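-- pv_equiv track=rewrite | github.com/wangsun39/leetcode | allcode/LCCUP/LCP41flipChess.py | flipChess1
-- ===== SOURCE A (Python) =====
-- from typing import List
-- from collections import deque
-- from typing import List
--
-- def flipChess1(chessboard: List[str]) -> int:
--     # 2023/6/21  改进写法
--     dir = [[-1, 0], [1, 0], [-1, -1], [-1, 1], [1, -1], [1, 1], [0, -1], [0, 1]]
--     r, c = len(chessboard), len(chessboard[0])
--     ans = 0
--     for i in range(r):
--         for j in range(c):
--             if chessboard[i][j] != '.': continue
--             cnt = 0
--             cb = [list(x) for x in chessboard]
--             dq = deque([[i, j]])  # 刚变成黑子的位置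
--             while dq:
--                 x, y = dq.popleft()
--                 for u, v in dir:
--                     xx, yy = x + u, y + v
--                     while 0 <= xx < r and 0 <= yy < c and cb[xx][yy] == 'O':
--                         xx, yy = xx + u, yy + v
--                     if abs(xx - x) == 1 or not (0 <= xx < r and 0 <= yy < c) or cb[xx][yy] == '.':
--                         continue
--                     xx, yy = xx - u, yy - v
--                     while xx != x or yy != y:
--                         dq.append([xx, yy])
--                         cb[xx][yy] = 'X'
--                         xx, yy = xx - u, yy - v
--                         cnt += 1
--
--             ans = max(ans, cnt)
--
--     return ans
-- ===== SOURCE B (Python) =====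
-- def flipChess1(chessboard):
--     DIRS = ((-1, 0), (1, 0), (-1, -1), (-1, 1), (1, -1), (1, 1), (0, -1), (0, 1))
--     r, c = len(chessboard), len(chessboard[0])
--
--     def ray_gains(x, y, flipped):
--         # pieces won by the 8 rays from (x, y), where cells in `flipped` count as black
--         got = []
--         for u, v in DIRS:
--             k = 1
--             while (0 <= x + k * u < r and 0 <= y + k * v < c
--                    and (x + k * u, y + k * v) not in flipped
--                    and chessboard[x + k * u][y + k * v] == 'O'):
--                 k += 1
--             xx, yy = x + k * u, y + k * v
--             if k > 1 and 0 <= xx < r and 0 <= yy < c and \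
--                     ((xx, yy) in flipped or chessboard[xx][yy] != '.'):
--                 got += [(x + t * u, y + t * v) for t in range(1, k)]
--         return got
--
--     best = 0
--     for i in range(r):
--         for j in range(c):
--             if chessboard[i][j] != '.':
--                 continue
--             # the placed piece flips along its rays on the fresh board, once;
--             # then the newly flipped pieces cascade to a fixed point
--             flipped = set(ray_gains(i, j, set()))
--             while True:
--                 gained = {p for q in flipped for p in ray_gains(q[0], q[1], flipped)}
--                 if not gained:
--                     break
--                 flipped |= gained
--             best = max(best, len(flipped))
--     return best
-- ===== Notes on version B (the rewrite author's own statement) =====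
-- stated objective: alternative
-- what changed: Replaces A's mutable-board BFS (deque of freshly flipped cells, in-place cb mutation, incremental counter) by a queue-free fixed-point computation on the immutable board: the placed piece's rays are flipped once, then the set of flipped cells is repeatedly re-swept as a whole until no new bracketed run appears, and the count is the final set's size.
import Mathlib
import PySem

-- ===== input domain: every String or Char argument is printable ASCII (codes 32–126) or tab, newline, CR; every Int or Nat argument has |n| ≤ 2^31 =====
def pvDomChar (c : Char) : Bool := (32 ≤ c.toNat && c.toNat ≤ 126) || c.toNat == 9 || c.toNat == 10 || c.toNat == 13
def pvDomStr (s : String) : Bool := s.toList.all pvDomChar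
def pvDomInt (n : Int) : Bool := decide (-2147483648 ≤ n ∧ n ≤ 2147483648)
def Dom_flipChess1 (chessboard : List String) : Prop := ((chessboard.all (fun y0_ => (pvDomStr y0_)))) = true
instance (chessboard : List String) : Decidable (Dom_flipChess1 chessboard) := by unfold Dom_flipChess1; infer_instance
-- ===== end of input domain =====

-- B re-implements A's breadth-first flip cascade as a queue-free fixed-point sweep over an
-- immutable board: place, flip the placed piece's rays once, then sweep all flipped pieces to a
-- fixed point (objective: alternative algorithm, same values).

-- ===== PORT A =====
-- the 8 directions (shared table of constants)
def pvDirs : List (Int × Int) := [(-1,0),(1,0),(-1,-1),(-1,1),(1,-1),(1,1),(0,-1),(0,1)]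

-- cb[x] / cb[x][y]: A only reads and writes them under its 0 ≤ · < r/c guards (and Pre_ keeps
-- every row at least c long), so the defaults of pyGetD are never reached there.
def pvRow (cb : List (List Char)) (x : Int) : List Char := PySem.List.pyGetD cb x []
def pvCell (cb : List (List Char)) (x y : Int) : Char := PySem.List.pyGetD (pvRow cb x) y ' '
-- cb[x][y] = 'X' (in-place update; indices nonnegative and in range at every use)
def pvSet (cb : List (List Char)) (x y : Int) : List (List Char) :=
  cb.set x.toNat ((pvRow cb x).set y.toNat 'X')

-- while 0 <= xx < r and 0 <= yy < c and cb[xx][yy] == 'O': step  (fuel ≥ steps to leave the board)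
def pvSkipA (cb : List (List Char)) (r c u v : Int) : Int → Int → Nat → Int × Int
  | xx, yy, 0 => (xx, yy)
  | xx, yy, f+1 =>
    if 0 ≤ xx ∧ xx < r ∧ 0 ≤ yy ∧ yy < c ∧ pvCell cb xx yy = 'O' then
      pvSkipA cb r c u v (xx + u) (yy + v) f
    else (xx, yy)

-- while xx != x or yy != y: append to dq, flip to 'X', step back, count
def pvFlipA (x y u v : Int) :
    List (List Char) × List (Int × Int) × Int → Int → Int → Nat → List (List Char) × List (Int × Int) × Int
  | st, _, _, 0 => st
  | (cb, dq, cnt), xx, yy, f+1 =>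
    if xx ≠ x ∨ yy ≠ y then
      pvFlipA x y u v (pvSet cb xx yy, dq ++ [(xx, yy)], cnt + 1) (xx - u) (yy - v) f
    else (cb, dq, cnt)

-- the body of `for u, v in dir:`
def pvDirStep (r c x y : Int) (st : List (List Char) × List (Int × Int) × Int) (d : Int × Int) :
    List (List Char) × List (Int × Int) × Int :=
  let xy := pvSkipA st.1 r c d.1 d.2 (x + d.1) (y + d.2) ((r + c).toNat + 1)
  if (xy.1 - x).natAbs = 1 ∨ ¬(0 ≤ xy.1 ∧ xy.1 < r ∧ 0 ≤ xy.2 ∧ xy.2 < c) ∨ pvCell st.1 xy.1 xy.2 = '.' then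
    st
  else
    pvFlipA x y d.1 d.2 st (xy.1 - d.1) (xy.2 - d.2) ((r + c).toNat + 1)

-- while dq: pop left and scan the 8 directions (fuel ≥ total pops, see the claim's lemmas)
def pvLoopA (r c : Int) : List (List Char) → List (Int × Int) → Int → Nat → Int
  | _, _, cnt, 0 => cnt
  | cb, dq, cnt, f+1 =>
    match dq with
    | [] => cnt
    | (x, y) :: dq' =>
      let st := pvDirs.foldl (fun s d => pvDirStep r c x y s d) (cb, dq', cnt)
      pvLoopA r c st.1 st.2.1 st.2.2 f

def flipChess1 (chessboard : List String) : Int :=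
  let r : Int := chessboard.length
  let c : Int := PySem.Str.len (PySem.List.pyGetD chessboard 0 "")   -- len(chessboard[0]); [] is outside Pre_
  (PySem.List.pyRange 0 r).foldl (fun ans i =>
    (PySem.List.pyRange 0 c).foldl (fun ans j =>
      if ((PySem.Str.pyGet? (PySem.List.pyGetD chessboard i "") j).getD ' ') ≠ '.' then ans
      else
        let cnt := pvLoopA r c (chessboard.map String.toList) [(i, j)] 0 (2 * (r * c).toNat + 2)
        max ans cnt) ans) 0

-- ===== PORT B =====
-- chessboard[x][y] (reads are under B's in-range guards, so the default is never reached)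
def pvOrig (bd : List String) (x y : Int) : Char :=
  (PySem.Str.pyGet? (PySem.List.pyGetD bd x "") y).getD ' '

-- while in range, not yet flipped and an 'O': k += 1
def pvKScan (bd : List String) (r c : Int) (flipped : PySem.Set (Int × Int)) (x y u v : Int) :
    Nat → Nat → Nat
  | k, 0 => k
  | k, f+1 =>
    if 0 ≤ x + k * u ∧ x + k * u < r ∧ 0 ≤ y + k * v ∧ y + k * v < c ∧
        (x + k * u, y + k * v) ∉ flipped ∧ pvOrig bd (x + k * u) (y + k * v) = 'O' then
      pvKScan bd r c flipped x y u v (k + 1) f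
    else k

-- pieces won by the 8 rays from (x, y), cells in `flipped` counting as black
def pvRayGains (bd : List String) (r c x y : Int) (flipped : PySem.Set (Int × Int)) : List (Int × Int) :=
  pvDirs.foldl (fun got d =>
    let k := pvKScan bd r c flipped x y d.1 d.2 1 ((r + c).toNat + 1)
    if 1 < k ∧ 0 ≤ x + k * d.1 ∧ x + k * d.1 < r ∧ 0 ≤ y + k * d.2 ∧ y + k * d.2 < c ∧
        ((x + k * d.1, y + k * d.2) ∈ flipped ∨ pvOrig bd (x + k * d.1) (y + k * d.2) ≠ '.') then
      got ++ (PySem.List.pyRange 1 k).map (fun t => (x + t * d.1, y + t * d.2))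
    else got) []

-- while True: gather all gains of the flipped pieces, stop when none  (fuel ≥ r*c+1 rounds)
def pvSweep (bd : List String) (r c : Int) : PySem.Set (Int × Int) → Nat → PySem.Set (Int × Int)
  | flipped, 0 => flipped
  | flipped, f+1 =>
    let gained : PySem.Set (Int × Int) :=
      PySem.Set.ofList (flipped.foldl (fun acc q => acc ++ pvRayGains bd r c q.1 q.2 flipped) [])
    if gained = [] then flipped
    else pvSweep bd r c (PySem.Set.union flipped gained) f

def flipChess1_alt (chessboard : List String) : Int :=
  let r : Int := chessboard.length
  let c : Int := PySem.Str.len (PySem.List.pyGetD chessboard 0 "")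
  (PySem.List.pyRange 0 r).foldl (fun best i =>
    (PySem.List.pyRange 0 c).foldl (fun best j =>
      if pvOrig chessboard i j ≠ '.' then best
      else
        let f0 := PySem.Set.ofList (pvRayGains chessboard r c i j PySem.Set.empty)
        let ff := pvSweep chessboard r c f0 ((r * c).toNat + 1)
        max best ((ff.length : Int))) best) 0

-- ===== PRECONDITION & SPEC =====
-- A raises IndexError exactly when the board is empty (chessboard[0]) or some row is shorter than
-- row 0 (the outer loop reads chessboard[i][j] for every j < len(chessboard[0])); Pre_ excludes
-- exactly those inputs.
def Pre_flipChess1 (chessboard : List String) : Prop :=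
  chessboard ≠ [] ∧ ∀ s ∈ chessboard, PySem.Str.len (chessboard.headD "") ≤ PySem.Str.len s
instance (chessboard : List String) : Decidable (Pre_flipChess1 chessboard) := by
  unfold Pre_flipChess1; infer_instance
def pvWitness_flipChess1 : List String := [".OX", "OO.", "X.O"]

def Spec_flipChess1 (chessboard : List String) (out : Int) : Prop := out = flipChess1_alt chessboard
instance (chessboard : List String) (out : Int) : Decidable (Spec_flipChess1 chessboard out) := by
  unfold Spec_flipChess1; infer_instance

-- ===== CLAIM (what is proved, stated in full; the proofs are below) =====
def Claim_equal_flipChess1 : Prop := ∀ (chessboard : List String), Dom_flipChess1 chessboard →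
  Pre_flipChess1 chessboard → Spec_flipChess1 chessboard (flipChess1 chessboard)

-- ===== LEMMAS AND PROOFS =====

-- ---- the common abstract description: cells derivable from a start square ----

def Inb (bd : List String) (x y : Int) : Prop :=
  0 ≤ x ∧ x < (bd.length : Int) ∧ 0 ≤ y ∧ y < PySem.Str.len (bd.headD "")

def Blk (bd : List String) (x y : Int) : Prop := pvOrig bd x y ≠ '.' ∧ pvOrig bd x y ≠ 'O'

/-- point `s` steps along ray `(u,v)` from `p`. -/
def rp (p : Int × Int) (u v : Int) (s : Nat) : Int × Int := (p.1 + (s : Int) * u, p.2 + (s : Int) * v)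

/-- a currently-white cell: in bounds, an original `'O'`, not yet flipped (`S` = flipped cells). -/
def CurO (bd : List String) (S : List (Int × Int)) (x y : Int) : Prop :=
  Inb bd x y ∧ (x, y) ∉ S ∧ pvOrig bd x y = 'O'

/-- a run of `'O'`s of length `k ≥ 1` from `o` (exclusive) in direction `(u,v)`,
    bracketed by a black cell (an original non-`'.'`/non-`'O'` or a flipped cell of `S`). -/
def StepInst (bd : List String) (S : List (Int × Int)) (o : Int × Int) (u v : Int) (k : Nat) : Prop :=
  o ∈ S ∧ 1 ≤ k ∧ (∀ s, 1 ≤ s → s ≤ k → CurO bd S (rp o u v s).1 (rp o u v s).2) ∧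
  Inb bd (rp o u v (k+1)).1 (rp o u v (k+1)).2 ∧
  (rp o u v (k+1) ∈ S ∨ Blk bd (rp o u v (k+1)).1 (rp o u v (k+1)).2)

/-- the cells the cascade from `st` flips: first the rays of the placed piece on the original
    board, then runs bracketed between a flipped piece and a black piece. -/
inductive Der (bd : List String) (st : Int × Int) : Int × Int → Prop where
  | base (u v : Int) (k t : Nat) : (u, v) ∈ pvDirs → 1 ≤ t → t ≤ k →
      (∀ s, 1 ≤ s → s ≤ k →
        Inb bd (rp st u v s).1 (rp st u v s).2 ∧ pvOrig bd (rp st u v s).1 (rp st u v s).2 = 'O') →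
      Inb bd (rp st u v (k+1)).1 (rp st u v (k+1)).2 →
      Blk bd (rp st u v (k+1)).1 (rp st u v (k+1)).2 →
      Der bd st (rp st u v t)
  | stepB (o : Int × Int) (u v : Int) (k t : Nat) : Der bd st o → (u, v) ∈ pvDirs → 1 ≤ t → t ≤ k →
      (∀ s, 1 ≤ s → s ≤ k →
        Inb bd (rp o u v s).1 (rp o u v s).2 ∧ pvOrig bd (rp o u v s).1 (rp o u v s).2 = 'O') →
      Inb bd (rp o u v (k+1)).1 (rp o u v (k+1)).2 →
      Blk bd (rp o u v (k+1)).1 (rp o u v (k+1)).2 →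
      Der bd st (rp o u v t)
  | stepD (o : Int × Int) (u v : Int) (k t : Nat) : Der bd st o → (u, v) ∈ pvDirs → 1 ≤ t → t ≤ k →
      (∀ s, 1 ≤ s → s ≤ k →
        Inb bd (rp o u v s).1 (rp o u v s).2 ∧ pvOrig bd (rp o u v s).1 (rp o u v s).2 = 'O') →
      Inb bd (rp o u v (k+1)).1 (rp o u v (k+1)).2 →
      Der bd st (rp o u v (k+1)) →
      Der bd st (rp o u v t)

-- ---- direction-table facts ----

lemma dirs_cases (d : Int × Int) (hd : d ∈ pvDirs) :
    d = (-1,0) ∨ d = (1,0) ∨ d = (-1,-1) ∨ d = (-1,1) ∨ d = (1,-1) ∨ d = (1,1) ∨ d = (0,-1) ∨ d = (0,1) := by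
  simpa [pvDirs] using hd

lemma dirs_neg {d : Int × Int} (hd : d ∈ pvDirs) : (-d.1, -d.2) ∈ pvDirs := by
  rcases dirs_cases d hd with h|h|h|h|h|h|h|h <;> subst h <;> simp [pvDirs]

lemma rp_inj {d : Int × Int} (hd : d ∈ pvDirs) {p : Int × Int} {s t : Nat}
    (h : rp p d.1 d.2 s = rp p d.1 d.2 t) : s = t := by
  rcases dirs_cases d hd with h'|h'|h'|h'|h'|h'|h'|h' <;> subst h' <;>
    simp only [rp, Prod.mk.injEq] at h <;> omega

lemma rp_zero (p : Int × Int) (u v : Int) : rp p u v 0 = p := by simp [rp]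

lemma rp_add (p : Int × Int) (u v : Int) (a b : Nat) :
    rp (rp p u v a) u v b = rp p u v (a + b) := by
  simp only [rp, Prod.mk.injEq]; constructor <;> (push_cast; ring)

lemma rp_cross {d e : Int × Int} (hd : d ∈ pvDirs) (he : e ∈ pvDirs) (hne : d ≠ e)
    {p : Int × Int} {s t : Nat} (hs : 1 ≤ s) (ht : 1 ≤ t) :
    rp p d.1 d.2 s ≠ rp p e.1 e.2 t := by
  rcases dirs_cases d hd with h|h|h|h|h|h|h|h <;> subst h <;>
    rcases dirs_cases e he with h'|h'|h'|h'|h'|h'|h'|h' <;> subst h' <;>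
      first
        | exact absurd rfl hne
        | (intro h; simp only [rp, Prod.mk.injEq] at h; omega)

-- ---- minimality of Der: any base-containing, step-closed set contains every derivable cell ----

theorem der_minimal (bd : List String) (st : Int × Int) (P : Int × Int → Prop)
    (hbase : ∀ u v (k t : Nat), (u, v) ∈ pvDirs → 1 ≤ t → t ≤ k →
      (∀ s, 1 ≤ s → s ≤ k →
        Inb bd (rp st u v s).1 (rp st u v s).2 ∧ pvOrig bd (rp st u v s).1 (rp st u v s).2 = 'O') →
      Inb bd (rp st u v (k+1)).1 (rp st u v (k+1)).2 →
      Blk bd (rp st u v (k+1)).1 (rp st u v (k+1)).2 → P (rp st u v t))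
    (hstep : ∀ (o : Int × Int) u v (k : Nat), (u, v) ∈ pvDirs → P o → 1 ≤ k →
      (∀ s, 1 ≤ s → s ≤ k → Inb bd (rp o u v s).1 (rp o u v s).2 ∧
        pvOrig bd (rp o u v s).1 (rp o u v s).2 = 'O' ∧ ¬ P (rp o u v s)) →
      Inb bd (rp o u v (k+1)).1 (rp o u v (k+1)).2 →
      (P (rp o u v (k+1)) ∨ Blk bd (rp o u v (k+1)).1 (rp o u v (k+1)).2) →
      ∀ t, 1 ≤ t → t ≤ k → P (rp o u v t)) :
    ∀ p, Der bd st p → P p := by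
  have window : ∀ (o : Int × Int) (u v : Int), (u, v) ∈ pvDirs → ∀ (k : Nat),
      (∀ s, 1 ≤ s → s ≤ k → Inb bd (rp o u v s).1 (rp o u v s).2 ∧
        pvOrig bd (rp o u v s).1 (rp o u v s).2 = 'O') →
      Inb bd (rp o u v (k+1)).1 (rp o u v (k+1)).2 → P o →
      (P (rp o u v (k+1)) ∨ Blk bd (rp o u v (k+1)).1 (rp o u v (k+1)).2) →
      ∀ n a b t : Nat, b - a ≤ n → a < t → t < b → b ≤ k + 1 →
        (a = 0 ∨ P (rp o u v a)) → (b = k + 1 ∨ P (rp o u v b)) → P (rp o u v t) := by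
    intro o u v hd k hrun hend hPo hPe n
    induction n with
    | zero => intro a b t hba hat htb _ _ _; omega
    | succ n ih =>
      intro a b t hba hat htb hbk ha hb
      by_cases hex : ∃ m, a < m ∧ m < b ∧ P (rp o u v m)
      · obtain ⟨m, ham, hmb, hPm⟩ := hex
        rcases Nat.lt_trichotomy m t with hmt | hmt | hmt
        · exact ih m b t (by omega) hmt htb hbk (Or.inr hPm) hb
        · exact hmt ▸ hPm
        · exact ih a m t (by omega) hat hmt (by omega) ha (Or.inr hPm)
      · push Not at hex
        have hPa' : P (rp o u v a) := by
          rcases ha with ha0 | hPa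
          · subst ha0; simpa [rp_zero] using hPo
          · exact hPa
        have hk1 : 1 ≤ b - 1 - a := by omega
        have hta1 : 1 ≤ t - a := by omega
        have hta2 : t - a ≤ b - 1 - a := by omega
        have key := hstep (rp o u v a) u v (b - 1 - a) hd hPa' hk1 ?_ ?_ ?_ (t - a) hta1 hta2
        · rw [rp_add, Nat.add_sub_cancel' (by omega : a ≤ t)] at key
          exact key
        · intro s hs1 hs2
          rw [rp_add]
          have h1 : 1 ≤ a + s := by omega
          have h2 : a + s ≤ k := by omega
          have h3 : a < a + s := by omega
          have h4 : a + s < b := by omega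
          exact ⟨(hrun (a+s) h1 h2).1, (hrun (a+s) h1 h2).2, fun hPs => (hex (a+s) h3 h4) hPs⟩
        · rw [rp_add]
          have hb1 : a + (b - 1 - a + 1) = b := by omega
          rw [hb1]
          by_cases hbe : b = k + 1
          · subst hbe; exact hend
          · exact (hrun b (by omega) (by omega)).1
        · rw [rp_add]
          have hb1 : a + (b - 1 - a + 1) = b := by omega
          rw [hb1]
          rcases hb with hbe | hPb
          · subst hbe; exact hPe
          · exact Or.inl hPb
  intro p hder
  induction hder with
  | base u v k t hd ht1 htk hrun hend hblk => exact hbase u v k t hd ht1 htk hrun hend hblk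
  | stepB o u v k t _ hd ht1 htk hrun hend hblk iho =>
    exact window o u v hd k hrun hend iho (Or.inr hblk) (k+1) 0 (k+1) t (by omega) (by omega)
      (by omega) (by omega) (Or.inl rfl) (Or.inl rfl)
  | stepD o u v k t _ hd ht1 htk hrun hend _ iho ihe =>
    exact window o u v hd k hrun hend iho (Or.inl ihe) (k+1) 0 (k+1) t (by omega) (by omega)
      (by omega) (by omega) (Or.inl rfl) (Or.inl rfl)

-- ---- board representation for port A ----

/-- `cb` is the original board with exactly the cells of `S` turned to `'X'`. -/
def RepA (bd : List String) (S : List (Int × Int)) (cb : List (List Char)) : Prop :=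
  cb.length = bd.length ∧
  (∀ i : Nat, (cb.getD i []).length = (bd.getD i "").toList.length) ∧
  (∀ x y, Inb bd x y → pvCell cb x y = if (x, y) ∈ S then 'X' else pvOrig bd x y)

lemma rep_congr {bd : List String} {S S' : List (Int × Int)} {cb : List (List Char)}
    (h : ∀ q, q ∈ S ↔ q ∈ S') (hr : RepA bd S cb) : RepA bd S' cb := by
  refine ⟨hr.1, hr.2.1, fun x y hxy => ?_⟩
  rw [hr.2.2 x y hxy]
  by_cases hm : (x, y) ∈ S
  · rw [if_pos hm, if_pos ((h _).1 hm)]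
  · rw [if_neg hm, if_neg (fun hm' => hm ((h _).2 hm'))]

lemma pvRow_getD (cb : List (List Char)) {x : Int} (hx : 0 ≤ x) :
    pvRow cb x = cb.getD x.toNat [] := by
  rw [pvRow, PySem.List.pyGetD_of_nonneg _ _ hx]

lemma pvCell_getD (cb : List (List Char)) {x y : Int} (hx : 0 ≤ x) (hy : 0 ≤ y) :
    pvCell cb x y = (cb.getD x.toNat []).getD y.toNat ' ' := by
  rw [pvCell, pvRow, PySem.List.pyGetD_of_nonneg _ _ hx, PySem.List.pyGetD_of_nonneg _ _ hy]

lemma pvOrig_getD (bd : List String) {x y : Int} (hx : 0 ≤ x) (hy : 0 ≤ y) :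
    pvOrig bd x y = ((bd.getD x.toNat "").toList).getD y.toNat ' ' := by
  rw [pvOrig, PySem.List.pyGetD_of_nonneg _ _ hx]
  rw [show PySem.Str.pyGet? (bd.getD x.toNat "") y = PySem.List.pyGet? (bd.getD x.toNat "").toList y by
    simp [PySem.Str.pyGet?]]
  rw [PySem.List.pyGet?_of_nonneg _ hy]
  exact (List.getD_eq_getElem?_getD).symm

lemma rep_row (bd : List String) (i : Nat) :
    ((bd.map String.toList).getD i []) = (bd.getD i "").toList := by
  by_cases h : i < bd.length
  · rw [List.getD_eq_getElem _ _ (by simpa using h), List.getD_eq_getElem _ _ h]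
    simp
  · rw [List.getD_eq_default _ _ (by simpa using not_lt.mp h),
      List.getD_eq_default _ _ (not_lt.mp h)]
    simp

lemma rep_init (bd : List String) : RepA bd [] (bd.map String.toList) := by
  refine ⟨by simp, fun i => by rw [rep_row], fun x y hxy => ?_⟩
  obtain ⟨hx, _, hy, _⟩ := hxy
  rw [pvCell_getD _ hx hy, pvOrig_getD _ hx hy, rep_row]
  simp

lemma inb_row_long {bd : List String} {x y : Int} (hxy : Inb bd x y)
    (hlen : ∀ s ∈ bd, PySem.Str.len (bd.headD "") ≤ PySem.Str.len s) :
    y.toNat < (bd.getD x.toNat "").toList.length := by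
  obtain ⟨hx, hx2, hy, hy2⟩ := hxy
  have hxlt : x.toNat < bd.length := by omega
  have hmem : bd.getD x.toNat "" ∈ bd := by
    rw [List.getD_eq_getElem _ _ hxlt]; exact List.getElem_mem hxlt
  have := hlen _ hmem
  rw [PySem.Str.len_eq, PySem.Str.len_eq] at this
  have : (PySem.Str.len (bd.headD "")) ≤ ((bd.getD x.toNat "").toList.length : Int) := by
    rw [PySem.Str.len_eq]; exact_mod_cast this
  omega

lemma rep_set {bd : List String} {S : List (Int × Int)} {cb : List (List Char)}
    (hr : RepA bd S cb) {x y : Int} (hxy : Inb bd x y)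
    (hlen : ∀ s ∈ bd, PySem.Str.len (bd.headD "") ≤ PySem.Str.len s) :
    RepA bd ((x, y) :: S) (pvSet cb x y) := by
  obtain ⟨hl, hrl, hcell⟩ := hr
  obtain ⟨hx, hx2, hy, hy2⟩ := hxy
  have hxlt : x.toNat < cb.length := by omega
  have hylt : y.toNat < (pvRow cb x).length := by
    rw [pvRow, PySem.List.pyGetD_of_nonneg _ _ hx, hrl]
    exact inb_row_long ⟨hx, hx2, hy, hy2⟩ hlen
  have hrowget : ∀ i : Nat, ((pvSet cb x y).getD i []) =
      if i = x.toNat then (pvRow cb x).set y.toNat 'X' else cb.getD i [] := by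
    intro i
    by_cases hix : i = x.toNat
    · subst hix
      rw [if_pos rfl, pvSet, List.getD_eq_getElem?_getD, List.getElem?_set_self hxlt]
      rfl
    · rw [if_neg hix, pvSet, List.getD_eq_getElem?_getD,
        List.getElem?_set_ne (fun h => hix h.symm), List.getD_eq_getElem?_getD]
  refine ⟨by simp [pvSet, hl], fun i => ?_, fun x' y' hxy' => ?_⟩
  · rw [hrowget i]
    by_cases hix : i = x.toNat
    · subst hix
      rw [if_pos rfl, List.length_set, pvRow, PySem.List.pyGetD_of_nonneg _ _ hx, hrl]
    · rw [if_neg hix, hrl]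
  · obtain ⟨hx', hx2', hy', hy2'⟩ := hxy'
    rw [pvCell_getD _ hx' hy', hrowget x'.toNat]
    by_cases hxx : x' = x
    · subst hxx
      rw [if_pos rfl]
      by_cases hyy : y' = y
      · subst hyy
        rw [List.getD_eq_getElem?_getD, List.getElem?_set_self hylt]
        simp
      · have hyn : y'.toNat ≠ y.toNat := by omega
        rw [List.getD_eq_getElem?_getD, List.getElem?_set_ne (fun h => hyn h.symm),
          ← List.getD_eq_getElem?_getD, pvRow_getD _ hx', ← pvCell_getD _ hx' hy',
          hcell x' y' ⟨hx', hx2', hy', hy2'⟩]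
        have hne : (x', y') ≠ (x', y) := by simp [hyy]
        simp only [List.mem_cons, hne, false_or]
    · have hxn : x'.toNat ≠ x.toNat := by omega
      rw [if_neg hxn, ← pvCell_getD _ hx' hy', hcell x' y' ⟨hx', hx2', hy', hy2'⟩]
      have hne : (x', y') ≠ (x, y) := by simp [hxx]
      simp only [List.mem_cons, hne, false_or]
-- ---- the O-run scan of port A ----

def GoodA (cb : List (List Char)) (r c : Int) (q : Int × Int) : Prop :=
  0 ≤ q.1 ∧ q.1 < r ∧ 0 ≤ q.2 ∧ q.2 < c ∧ pvCell cb q.1 q.2 = 'O'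

lemma rp_succ (p : Int × Int) (u v : Int) (j : Nat) :
    rp p u v (j + 1) = ((rp p u v j).1 + u, (rp p u v j).2 + v) := by
  simp only [rp, Prod.mk.injEq]; constructor <;> (push_cast; ring)

lemma rp_pred (p : Int × Int) (u v : Int) (j : Nat) :
    ((rp p u v (j + 1)).1 - u, (rp p u v (j + 1)).2 - v) = rp p u v j := by
  simp only [rp, Prod.mk.injEq]; constructor <;> (push_cast; ring)

lemma rp_rev {o p : Int × Int} {u v : Int} {n : Nat}
    (h : rp o (-u) (-v) n = p) : o = rp p u v n := by
  have h1 := congrArg Prod.fst h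
  have h2 := congrArg Prod.snd h
  simp only [rp] at h1 h2
  have e1 : o.1 = p.1 + (n : Int) * u := by linarith [mul_neg ((n : Int)) u]
  have e2 : o.2 = p.2 + (n : Int) * v := by linarith [mul_neg ((n : Int)) v]
  simp only [rp]
  exact Prod.ext e1 e2

lemma rp_back (p : Int × Int) (u v : Int) {a b : Nat} (h : b ≤ a) :
    rp (rp p u v a) (-u) (-v) b = rp p u v (a - b) := by
  simp only [rp, Prod.mk.injEq]
  have : ((a - b : Nat) : Int) = (a : Int) - b := by omega
  rw [this]
  constructor <;> ring

lemma skipA_from (cb : List (List Char)) (r c : Int) (u v : Int) (p : Int × Int) :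
    ∀ (f j : Nat), 1 ≤ j → (∃ e : Nat, e ≤ f ∧ ¬ GoodA cb r c (rp p u v (j + e))) →
    ∃ m : Nat, j ≤ m ∧ m ≤ j + f ∧
      pvSkipA cb r c u v (rp p u v j).1 (rp p u v j).2 f = rp p u v m ∧
      (∀ s, j ≤ s → s < m → GoodA cb r c (rp p u v s)) ∧ ¬ GoodA cb r c (rp p u v m) := by
  intro f
  induction f with
  | zero =>
    rintro j hj ⟨e, he, hbad⟩
    have he0 : e = 0 := by omega
    subst he0
    exact ⟨j, le_refl j, by omega, rfl, fun s h1 h2 => ((by omega : False)).elim, by simpa using hbad⟩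
  | succ f ih =>
    rintro j hj ⟨e, he, hbad⟩
    by_cases hg : GoodA cb r c (rp p u v j)
    · have hstep : pvSkipA cb r c u v (rp p u v j).1 (rp p u v j).2 (f + 1)
          = pvSkipA cb r c u v (rp p u v (j+1)).1 (rp p u v (j+1)).2 f := by
        rw [rp_succ]
        exact if_pos hg
      have he1 : 1 ≤ e := by
        by_contra h
        have : e = 0 := by omega
        subst this
        simp at hbad
        exact hbad hg
      obtain ⟨m, hm1, hm1b, hm2, hm3, hm4⟩ := ih (j+1) (by omega)
        ⟨e - 1, by omega, by rw [show j + 1 + (e - 1) = j + e by omega]; exact hbad⟩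
      refine ⟨m, by omega, by omega, hstep.trans hm2, fun s h1 h2 => ?_, hm4⟩
      rcases Nat.eq_or_lt_of_le h1 with h | h
      · exact h ▸ hg
      · exact hm3 s h h2
    · exact ⟨j, le_refl j, by omega, if_neg hg, fun s h1 h2 => ((by omega : False)).elim, hg⟩

lemma skipA_char (cb : List (List Char)) (r c : Int) {d : Int × Int} (hd : d ∈ pvDirs)
    (p : Int × Int) (hp : 0 ≤ p.1 ∧ p.1 < r ∧ 0 ≤ p.2 ∧ p.2 < c) :
    ∃ m : Nat, 1 ≤ m ∧ m ≤ (r + c).toNat + 2 ∧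
      pvSkipA cb r c d.1 d.2 (p.1 + d.1) (p.2 + d.2) ((r + c).toNat + 1) = rp p d.1 d.2 m ∧
      (∀ s, 1 ≤ s → s < m → GoodA cb r c (rp p d.1 d.2 s)) ∧
      ¬ GoodA cb r c (rp p d.1 d.2 m) := by
  have hbad : ¬ GoodA cb r c (rp p d.1 d.2 (1 + ((r + c).toNat + 1 - 1))) := by
    rcases dirs_cases d hd with h|h|h|h|h|h|h|h <;> subst h <;>
      (rintro ⟨h1, h2, h3, h4, _⟩; simp only [rp] at h1 h2 h3 h4; push_cast at h1 h2 h3 h4; omega)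
  obtain ⟨m, hm1, hm1b, hm2, hm3, hm4⟩ := skipA_from cb r c d.1 d.2 p ((r + c).toNat + 1) 1
    (le_refl 1) ⟨(r + c).toNat + 1 - 1, by omega, hbad⟩
  refine ⟨m, hm1, by omega, ?_, hm3, hm4⟩
  rw [← hm2]
  congr 1 <;> simp [rp]

-- ---- the flip-back loop of port A ----

lemma flipA_rep {bd : List String} (hlen : ∀ s ∈ bd, PySem.Str.len (bd.headD "") ≤ PySem.Str.len s)
    {d : Int × Int} (hd : d ∈ pvDirs) (p : Int × Int) :
    ∀ (t fuel : Nat), t ≤ fuel → ∀ (S : List (Int × Int)) cb dq (cnt : Int), RepA bd S cb →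
    (∀ s, 1 ≤ s → s ≤ t → Inb bd (rp p d.1 d.2 s).1 (rp p d.1 d.2 s).2) →
    ∃ cb' E, pvFlipA p.1 p.2 d.1 d.2 (cb, dq, cnt) (rp p d.1 d.2 t).1 (rp p d.1 d.2 t).2 fuel
        = (cb', dq ++ E, cnt + (t : Int)) ∧
      RepA bd ((List.map (fun s => rp p d.1 d.2 (s + 1)) (List.range t)) ++ S) cb' ∧
      E.length = t ∧ (∀ q, q ∈ E ↔ ∃ s, 1 ≤ s ∧ s ≤ t ∧ q = rp p d.1 d.2 s) := by
  intro t
  induction t with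
  | zero =>
    intro fuel _ S cb dq cnt hrep _
    have hvac : ¬ ((rp p d.1 d.2 0).1 ≠ p.1 ∨ (rp p d.1 d.2 0).2 ≠ p.2) := by
      simp [rp_zero]
    refine ⟨cb, [], ?_, by simpa using hrep, rfl, by simp⟩
    cases fuel with
    | zero => simp [pvFlipA]
    | succ f => simp only [pvFlipA, if_neg hvac]; simp
  | succ t ih =>
    intro fuel hfuel S cb dq cnt hrep hin
    cases fuel with
    | zero => omega
    | succ f =>
      have hne : rp p d.1 d.2 (t + 1) ≠ p := by
        intro h
        have := rp_inj hd (p := p) (s := t + 1) (t := 0) (by rw [h, rp_zero])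
        omega
      have hcond : ((rp p d.1 d.2 (t+1)).1 ≠ p.1 ∨ (rp p d.1 d.2 (t+1)).2 ≠ p.2) := by
        by_contra h
        push Not at h
        exact hne (Prod.ext h.1 h.2)
      have hInb : Inb bd (rp p d.1 d.2 (t+1)).1 (rp p d.1 d.2 (t+1)).2 :=
        hin (t+1) (by omega) (le_refl _)
      have hrep1 : RepA bd ((rp p d.1 d.2 (t+1)) :: S)
          (pvSet cb (rp p d.1 d.2 (t+1)).1 (rp p d.1 d.2 (t+1)).2) := by
        have := rep_set hrep hInb hlen
        exact this
      obtain ⟨cb', E', heq, hrep', hlen', hmem'⟩ := ih f (by omega)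
        ((rp p d.1 d.2 (t+1)) :: S)
        (pvSet cb (rp p d.1 d.2 (t+1)).1 (rp p d.1 d.2 (t+1)).2)
        (dq ++ [rp p d.1 d.2 (t+1)]) (cnt + 1) hrep1
        (fun s h1 h2 => hin s h1 (by omega))
      refine ⟨cb', rp p d.1 d.2 (t+1) :: E', ?_, ?_, by simp [hlen'], ?_⟩
      · have hunf : pvFlipA p.1 p.2 d.1 d.2 (cb, dq, cnt)
            (rp p d.1 d.2 (t+1)).1 (rp p d.1 d.2 (t+1)).2 (f + 1)
            = pvFlipA p.1 p.2 d.1 d.2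
              (pvSet cb (rp p d.1 d.2 (t+1)).1 (rp p d.1 d.2 (t+1)).2,
               dq ++ [rp p d.1 d.2 (t+1)], cnt + 1)
              ((rp p d.1 d.2 (t+1)).1 - d.1) ((rp p d.1 d.2 (t+1)).2 - d.2) f := by
          simp only [pvFlipA, if_pos hcond]
        rw [hunf]
        have hpr := rp_pred p d.1 d.2 t
        have h1 : (rp p d.1 d.2 (t+1)).1 - d.1 = (rp p d.1 d.2 t).1 := by
          rw [← hpr]
        have h2 : (rp p d.1 d.2 (t+1)).2 - d.2 = (rp p d.1 d.2 t).2 := by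
          rw [← hpr]
        rw [h1, h2, heq]
        simp only [Prod.mk.injEq]
        refine ⟨trivial, by simp, by push_cast; ring⟩
      · refine rep_congr (fun q => ?_) hrep'
        simp only [List.mem_append, List.mem_map, List.mem_range, List.mem_cons]
        constructor
        · rintro (⟨s, hs1, hs2⟩ | (h | h))
          · exact Or.inl ⟨s, by omega, hs2⟩
          · exact Or.inl ⟨t, by omega, by rw [← h]⟩
          · exact Or.inr h
        · rintro (⟨s, hs1, hs2⟩ | h)
          · by_cases hst : s = t
            · subst hst; exact Or.inr (Or.inl hs2.symm)
            · exact Or.inl ⟨s, by omega, hs2⟩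
          · exact Or.inr (Or.inr h)
      · intro q
        simp only [List.mem_cons, hmem']
        constructor
        · rintro (h | ⟨s, h1, h2, h3⟩)
          · exact ⟨t+1, by omega, le_refl _, h⟩
          · exact ⟨s, h1, by omega, h3⟩
        · rintro ⟨s, h1, h2, h3⟩
          by_cases hst : s = t + 1
          · subst hst; exact Or.inl h3
          · exact Or.inr ⟨s, h1, by omega, h3⟩

-- ---- one direction of one pop of port A ----

lemma goodA_iff {bd : List String} {S : List (Int × Int)} {cb : List (List Char)}
    (hrep : RepA bd S cb) (q : Int × Int) :
    GoodA cb (bd.length : Int) (PySem.Str.len (bd.headD "")) q ↔ CurO bd S q.1 q.2 := by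
  constructor
  · rintro ⟨h1, h2, h3, h4, h5⟩
    have hinb : Inb bd q.1 q.2 := ⟨h1, h2, h3, h4⟩
    rw [hrep.2.2 _ _ hinb] at h5
    by_cases hm : (q.1, q.2) ∈ S
    · rw [if_pos hm] at h5; exact absurd h5 (by decide)
    · rw [if_neg hm] at h5; exact ⟨hinb, hm, h5⟩
  · rintro ⟨hinb, hm, ho⟩
    obtain ⟨h1, h2, h3, h4⟩ := hinb
    refine ⟨h1, h2, h3, h4, ?_⟩
    rw [hrep.2.2 _ _ ⟨h1, h2, h3, h4⟩, if_neg hm, ho]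

lemma dirStep_spec {bd : List String}
    (hlen : ∀ s ∈ bd, PySem.Str.len (bd.headD "") ≤ PySem.Str.len s)
    {S dq : List (Int × Int)} {cnt : Int} {cb : List (List Char)}
    (hrep : RepA bd S cb)
    (hmem : ∀ q ∈ S, Inb bd q.1 q.2)
    {p : Int × Int} (hpInb : Inb bd p.1 p.2) {d : Int × Int} (hd : d ∈ pvDirs) :
    ∃ F E cb',
      pvDirStep (bd.length : Int) (PySem.Str.len (bd.headD "")) p.1 p.2 (cb, dq, cnt) d
        = (cb', dq ++ E, cnt + (F.length : Int)) ∧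
      RepA bd (F ++ S) cb' ∧ F.Nodup ∧
      (∀ q, q ∈ E ↔ q ∈ F) ∧ E.length = F.length ∧
      (F = [] ∨ ∃ m : Nat, 2 ≤ m ∧
        (∀ q, q ∈ F ↔ ∃ s, 1 ≤ s ∧ s ≤ m - 1 ∧ q = rp p d.1 d.2 s) ∧
        (∀ s, 1 ≤ s → s ≤ m - 1 → CurO bd S (rp p d.1 d.2 s).1 (rp p d.1 d.2 s).2) ∧
        Inb bd (rp p d.1 d.2 m).1 (rp p d.1 d.2 m).2 ∧
        (rp p d.1 d.2 m ∈ S ∨ Blk bd (rp p d.1 d.2 m).1 (rp p d.1 d.2 m).2)) ∧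
      (∀ k, ¬ StepInst bd (F ++ S) p d.1 d.2 k) ∧
      (∀ o k, rp o (-d.1) (-d.2) (k + 1) = p → ¬ StepInst bd (F ++ S) o (-d.1) (-d.2) k) ∧
      (∀ k : Nat, 1 ≤ k → (∀ s, 1 ≤ s → s ≤ k → CurO bd S (rp p d.1 d.2 s).1 (rp p d.1 d.2 s).2) →
        Inb bd (rp p d.1 d.2 (k+1)).1 (rp p d.1 d.2 (k+1)).2 →
        rp p d.1 d.2 (k+1) ∉ S → Blk bd (rp p d.1 d.2 (k+1)).1 (rp p d.1 d.2 (k+1)).2 →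
        ∀ t, 1 ≤ t → t ≤ k → rp p d.1 d.2 t ∈ F) := by
  obtain ⟨h01, h02, h03, h04⟩ := hpInb
  obtain ⟨m, hm1, hmb, hskip, hgood, hbad⟩ :=
    skipA_char cb (bd.length : Int) (PySem.Str.len (bd.headD "")) hd p ⟨h01, h02, h03, h04⟩
  have hgoodC : ∀ s, 1 ≤ s → s < m →
      CurO bd S (rp p d.1 d.2 s).1 (rp p d.1 d.2 s).2 :=
    fun s h1 h2 => (goodA_iff hrep _).1 (hgood s h1 h2)
  have hbadC : ¬ CurO bd S (rp p d.1 d.2 m).1 (rp p d.1 d.2 m).2 :=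
    fun h => hbad ((goodA_iff hrep _).2 (by simpa using h))
  by_cases hguard : ((rp p d.1 d.2 m).1 - p.1).natAbs = 1 ∨
      ¬(0 ≤ (rp p d.1 d.2 m).1 ∧ (rp p d.1 d.2 m).1 < (bd.length : Int) ∧
        0 ≤ (rp p d.1 d.2 m).2 ∧ (rp p d.1 d.2 m).2 < PySem.Str.len (bd.headD "")) ∨
      pvCell cb (rp p d.1 d.2 m).1 (rp p d.1 d.2 m).2 = '.'
  · -- continue: nothing flips in this direction
    have heval : pvDirStep (bd.length : Int) (PySem.Str.len (bd.headD "")) p.1 p.2 (cb, dq, cnt) d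
        = (cb, dq, cnt) := by
      simp only [pvDirStep, hskip]
      rw [if_pos hguard]
    refine ⟨[], [], cb, by simpa using heval, by simpa using hrep, List.nodup_nil,
      by simp, rfl, Or.inl rfl, ?_, ?_, ?_⟩
    · rintro k ⟨hpS, hk1, hrun, hendInb, hendS⟩
      simp only [List.nil_append] at hpS hrun hendInb hendS
      have hklem : m = k + 1 := by
        have h1 : k + 1 ≤ m := by
          by_contra h
          exact hbadC (by
            have := hrun m hm1 (by omega)
            simpa using this)
        rcases Nat.eq_or_lt_of_le h1 with h | h
        · omega
        · exfalso
          have hc := hgoodC (k+1) (by omega) h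
          rcases hendS with hS | hB
          · exact hc.2.1 (by simpa using hS)
          · exact hB.2 hc.2.2
      rcases hguard with h | h | h
      · rcases dirs_cases d hd with hD|hD|hD|hD|hD|hD|hD|hD <;> subst hD <;>
          (simp only [rp] at h; omega)
      · exact h (by rw [hklem]; exact hendInb)
      · rw [hklem] at h
        rw [hrep.2.2 _ _ hendInb] at h
        by_cases hmem' : ((rp p d.1 d.2 (k+1)).1, (rp p d.1 d.2 (k+1)).2) ∈ S
        · rw [if_pos hmem'] at h; exact absurd h (by decide)
        · rw [if_neg hmem'] at h
          rcases hendS with hS | hB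
          · exact hmem' (by simpa using hS)
          · exact hB.1 h
    · rintro o k hop ⟨hoS, hk1, hrun, hendInb, hendS⟩
      simp only [List.nil_append] at hoS hrun
      have ho := rp_rev hop
      have hrunC : ∀ j, 1 ≤ j → j ≤ k → CurO bd S (rp p d.1 d.2 j).1 (rp p d.1 d.2 j).2 := by
        intro j hj1 hj2
        have := hrun (k + 1 - j) (by omega) (by omega)
        rw [ho, rp_back p d.1 d.2 (by omega)] at this
        simpa [show k + 1 - (k + 1 - j) = j by omega] using this
      have hklem : m = k + 1 := by
        have h1 : k + 1 ≤ m := by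
          by_contra h
          exact hbadC (by simpa using hrunC m hm1 (by omega))
        rcases Nat.eq_or_lt_of_le h1 with h | h
        · omega
        · exfalso
          have hc := hgoodC (k+1) (by omega) h
          exact hc.2.1 (by rw [← ho]; simpa using hoS)
      have hoInb : Inb bd (rp p d.1 d.2 m).1 (rp p d.1 d.2 m).2 := by
        rw [hklem, ← ho]; exact hmem o hoS
      rcases hguard with h | h | h
      · rcases dirs_cases d hd with hD|hD|hD|hD|hD|hD|hD|hD <;> subst hD <;>
          (simp only [rp] at h; omega)
      · exact h hoInb
      · rw [hrep.2.2 _ _ hoInb] at h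
        rw [if_pos (by rw [hklem, ← ho]; simpa using hoS)] at h
        exact absurd h (by decide)
    · intro k hk1 hrun hendInb hendnS hBlk t ht1 htk
      exfalso
      have hklem : m = k + 1 := by
        have h1 : k + 1 ≤ m := by
          by_contra h
          exact hbadC (hrun m hm1 (by omega))
        rcases Nat.eq_or_lt_of_le h1 with h | h
        · omega
        · exact absurd (hgoodC (k+1) (by omega) h).2.2 hBlk.2
      rcases hguard with h | h | h
      · rcases dirs_cases d hd with hD|hD|hD|hD|hD|hD|hD|hD <;> subst hD <;>
          (simp only [rp] at h; omega)
      · exact h (by rw [hklem]; exact hendInb)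
      · rw [hklem] at h
        rw [hrep.2.2 _ _ hendInb, if_neg (by simpa using hendnS)] at h
        exact hBlk.1 h
  · -- flip branch
    push Not at hguard
    obtain ⟨hn1, hn2, hn3⟩ := hguard
    have hflipstart1 : (rp p d.1 d.2 m).1 - d.1 = (rp p d.1 d.2 (m - 1)).1 := by
      have := rp_pred p d.1 d.2 (m - 1)
      rw [show m - 1 + 1 = m by omega] at this
      rw [← this]
    have hflipstart2 : (rp p d.1 d.2 m).2 - d.2 = (rp p d.1 d.2 (m - 1)).2 := by
      have := rp_pred p d.1 d.2 (m - 1)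
      rw [show m - 1 + 1 = m by omega] at this
      rw [← this]
    obtain ⟨cb', E, hfeq, hfrep, hflen, hfmem⟩ := flipA_rep hlen hd p (m - 1)
      (((bd.length : Int) + PySem.Str.len (bd.headD "")).toNat + 1) (by omega) S cb dq cnt hrep
      (fun s h1 h2 => (hgoodC s h1 (by omega)).1)
    have heval : pvDirStep (bd.length : Int) (PySem.Str.len (bd.headD "")) p.1 p.2 (cb, dq, cnt) d
        = (cb', dq ++ E, cnt + ((m : Int) - 1)) := by
      simp only [pvDirStep, hskip]
      rw [if_neg (by push Not; exact ⟨hn1, hn2, hn3⟩)]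
      rw [hflipstart1, hflipstart2, hfeq]
      have : ((m - 1 : Nat) : Int) = (m : Int) - 1 := by omega
      rw [this]
    refine ⟨(List.range (m - 1)).map (fun s => rp p d.1 d.2 (s + 1)), E, cb', ?_, hfrep, ?_,
      ?_, by simp [hflen], ?_, ?_, ?_, ?_⟩
    · rw [heval]
      have : (((List.range (m - 1)).map (fun s => rp p d.1 d.2 (s + 1))).length : Int)
          = (m : Int) - 1 := by simp; omega
      rw [this]
    · refine List.Nodup.map ?_ List.nodup_range
      intro a b hab
      have := rp_inj hd hab
      omega
    · intro q
      rw [hfmem q]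
      simp only [List.mem_map, List.mem_range]
      constructor
      · rintro ⟨s, h1, h2, h3⟩
        exact ⟨s - 1, by omega, by rw [show s - 1 + 1 = s by omega]; exact h3.symm⟩
      · rintro ⟨s, h1, h2⟩
        exact ⟨s + 1, by omega, by omega, h2.symm⟩
    · by_cases hm2 : 2 ≤ m
      · refine Or.inr ⟨m, hm2, ?_, fun s h1 h2 => hgoodC s h1 (by omega), hn2, ?_⟩
        · intro q
          simp only [List.mem_map, List.mem_range]
          constructor
          · rintro ⟨s, h1, h2⟩
            exact ⟨s + 1, by omega, by omega, h2.symm⟩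
          · rintro ⟨s, h1, h2, h3⟩
            exact ⟨s - 1, by omega, by rw [show s - 1 + 1 = s by omega]; exact h3.symm⟩
        · by_cases hS : rp p d.1 d.2 m ∈ S
          · exact Or.inl hS
          · refine Or.inr ⟨?_, ?_⟩
            · intro hdot
              have : pvCell cb (rp p d.1 d.2 m).1 (rp p d.1 d.2 m).2 = '.' := by
                rw [hrep.2.2 _ _ hn2, if_neg (by simpa using hS), hdot]
              exact hn3 this
            · intro hO
              exact hbadC ⟨hn2, by simpa using hS, hO⟩
      · -- m = 1: the walk-back loop runs zero times (only a sideways direction reaches here)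
        have hm1' : m = 1 := by omega
        refine Or.inl ?_
        rw [hm1']
        simp
    · rintro k ⟨hpS, hk1, hrun, _, _⟩
      have h1 := hrun 1 (le_refl 1) hk1
      by_cases hm2 : 2 ≤ m
      · exact h1.2.1 (by
          refine List.mem_append_left _ ?_
          exact List.mem_map.mpr ⟨0, List.mem_range.mpr (by omega), by simp⟩)
      · have hm1' : m = 1 := by omega
        have : CurO bd S (rp p d.1 d.2 1).1 (rp p d.1 d.2 1).2 := by
          refine ⟨h1.1, fun hq => h1.2.1 (List.mem_append_right _ hq), h1.2.2⟩
        exact hbadC (by rw [hm1']; exact this)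
    · rintro o k hop ⟨hoS, hk1, hrun, _, _⟩
      have ho := rp_rev hop
      have h1 := hrun k hk1 (le_refl k)
      rw [ho, rp_back p d.1 d.2 (by omega : k ≤ k + 1)] at h1
      rw [show k + 1 - k = 1 by omega] at h1
      by_cases hm2 : 2 ≤ m
      · exact h1.2.1 (by
          refine List.mem_append_left _ ?_
          exact List.mem_map.mpr ⟨0, List.mem_range.mpr (by omega), by simp⟩)
      · have hm1' : m = 1 := by omega
        have : CurO bd S (rp p d.1 d.2 1).1 (rp p d.1 d.2 1).2 := by
          refine ⟨h1.1, fun hq => h1.2.1 (List.mem_append_right _ hq), h1.2.2⟩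
        exact hbadC (by rw [hm1']; exact this)
    · intro k hk1 hrun hendInb hendnS hBlk t ht1 htk
      have hklem : m = k + 1 := by
        have h1 : k + 1 ≤ m := by
          by_contra h
          exact hbadC (hrun m hm1 (by omega))
        rcases Nat.eq_or_lt_of_le h1 with h | h
        · omega
        · exact absurd (hgoodC (k+1) (by omega) h).2.2 hBlk.2
      exact List.mem_map.mpr ⟨t - 1, List.mem_range.mpr (by omega),
        by rw [show t - 1 + 1 = t by omega]⟩

-- ---- the 8-direction fold of one pop ----

/-- pending work: every bracketed run of `S` is still waiting on the queue, or on the popped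
    cell `p` for a direction not yet processed (forward from `p`, or backward into `p`). -/
def JP (bd : List String) (S dq : List (Int × Int)) (p : Int × Int)
    (rem : List (Int × Int)) : Prop :=
  ∀ o u v k, (u, v) ∈ pvDirs → StepInst bd S o u v k →
    o ∈ dq ∨ rp o u v (k + 1) ∈ dq ∨ (o = p ∧ (u, v) ∈ rem) ∨
    (rp o u v (k + 1) = p ∧ (-u, -v) ∈ rem)

lemma stepInst_anti {bd : List String} {S F : List (Int × Int)} {o : Int × Int} {u v : Int}
    {k : Nat} (h : StepInst bd (F ++ S) o u v k)
    (ho : o ∉ F) (he : rp o u v (k + 1) ∉ F) : StepInst bd S o u v k := by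
  obtain ⟨h1, h2, h3, h4, h5⟩ := h
  refine ⟨(List.mem_append.mp h1).resolve_left ho, h2, ?_, h4, ?_⟩
  · intro s hs1 hs2
    obtain ⟨ha, hb, hc⟩ := h3 s hs1 hs2
    exact ⟨ha, fun hq => hb (List.mem_append_right _ hq), hc⟩
  · rcases h5 with h' | h'
    · exact Or.inl ((List.mem_append.mp h').resolve_left he)
    · exact Or.inr h'

lemma der_orig_O {bd : List String} {st q : Int × Int} (h : Der bd st q) :
    pvOrig bd q.1 q.2 = 'O' := by
  cases h with
  | base u v k t hd ht1 htk hrun _ _ => exact (hrun t ht1 htk).2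
  | stepB o u v k t _ hd ht1 htk hrun _ _ => exact (hrun t ht1 htk).2
  | stepD o u v k t _ hd ht1 htk hrun _ _ => exact (hrun t ht1 htk).2

lemma fold_spec {bd : List String} (st : Int × Int)
    (hlen : ∀ s ∈ bd, PySem.Str.len (bd.headD "") ≤ PySem.Str.len s)
    {p : Int × Int} (hpInb : Inb bd p.1 p.2) :
    ∀ (rem : List (Int × Int)), (∀ d ∈ rem, d ∈ pvDirs) → rem.Nodup →
    ∀ S dq (cnt : Int) cb, RepA bd S cb → S.Nodup →
      (∀ q ∈ S, Inb bd q.1 q.2 ∧ pvOrig bd q.1 q.2 = 'O' ∧ Der bd st q) →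
      (∀ q ∈ dq, q ∈ S) →
      JP bd S dq p rem →
      (Der bd st p ∨ (p = st ∧ pvOrig bd st.1 st.2 = '.' ∧
        (∀ q ∈ S, ∃ d' ∈ pvDirs, d' ∉ rem ∧ ∃ s : Nat, 1 ≤ s ∧ q = rp p d'.1 d'.2 s))) →
      cnt = (S.length : Int) →
    ∃ S' dq' cb',
      rem.foldl (fun s d =>
          pvDirStep (bd.length : Int) (PySem.Str.len (bd.headD "")) p.1 p.2 s d) (cb, dq, cnt)
        = (cb', dq', (S'.length : Int)) ∧
      (∀ q ∈ S, q ∈ S') ∧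
      RepA bd S' cb' ∧ S'.Nodup ∧
      (∀ q ∈ S', Inb bd q.1 q.2 ∧ pvOrig bd q.1 q.2 = 'O' ∧ Der bd st q) ∧
      (∀ q ∈ dq', q ∈ S') ∧
      (∃ Enew, dq' = dq ++ Enew) ∧ dq'.length + S.length = dq.length + S'.length ∧
      JP bd S' dq' p [] ∧
      (p = st → pvOrig bd st.1 st.2 = '.' → ∀ d ∈ rem, ∀ (k t : Nat), 1 ≤ t → t ≤ k →
        (∀ s, 1 ≤ s → s ≤ k → Inb bd (rp st d.1 d.2 s).1 (rp st d.1 d.2 s).2 ∧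
          pvOrig bd (rp st d.1 d.2 s).1 (rp st d.1 d.2 s).2 = 'O') →
        Inb bd (rp st d.1 d.2 (k+1)).1 (rp st d.1 d.2 (k+1)).2 →
        Blk bd (rp st d.1 d.2 (k+1)).1 (rp st d.1 d.2 (k+1)).2 → rp st d.1 d.2 t ∈ S') ∧
      (p = st → pvOrig bd st.1 st.2 = '.' → ∀ q ∈ S', ∃ d' ∈ pvDirs, ∃ s : Nat, 1 ≤ s ∧ q = rp p d'.1 d'.2 s) := by
  intro rem
  induction rem with
  | nil =>
    intro _ _ S dq cnt cb hrep hnd hmem hdsub hJ hcase hcnt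
    refine ⟨S, dq, cb, by rw [hcnt]; rfl, fun q hq => hq, hrep, hnd, hmem, hdsub,
      ⟨[], by simp⟩, by simp, ?_, by simp, ?_⟩
    · intro o u v k hduv hinst
      rcases hJ o u v k hduv hinst with h | h | h | h
      · exact Or.inl h
      · exact Or.inr (Or.inl h)
      · exact absurd h.2 (List.not_mem_nil)
      · exact absurd h.2 (List.not_mem_nil)
    · intro hpst hdot q hq
      rcases hcase with hder | ⟨_, _, hray⟩
      · exact absurd (der_orig_O (hpst ▸ hder)) (by rw [hdot]; decide)
      · obtain ⟨d', hd1, _, hs⟩ := hray q hq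
        exact ⟨d', hd1, hs⟩
  | cons d rem' ih =>
    intro hsub hndrem S dq cnt cb hrep hnd hmem hdsub hJ hcase hcnt
    have hd : d ∈ pvDirs := hsub d (List.mem_cons_self)
    obtain ⟨F, E, cb1, heval, hrep1, hFnd, hEF, hElen, hFchar, hkill6, hkill7, hcapt⟩ :=
      dirStep_spec hlen hrep (fun q hq => (hmem q hq).1) hpInb hd
    have hFnotS : ∀ q ∈ F, q ∉ S := by
      intro q hq
      rcases hFchar with hF0 | ⟨m, hm2, hFc, hrun, hIe, hEe⟩
      · rw [hF0] at hq; exact absurd hq (List.not_mem_nil)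
      · obtain ⟨sx, hs1, hs2, hs3⟩ := (hFc q).1 hq
        exact hs3 ▸ (hrun sx hs1 hs2).2.1
    have hndS1 : (F ++ S).Nodup := by
      refine List.Nodup.append hFnd hnd ?_
      intro a ha hb
      exact hFnotS a ha hb
    have hFray : ∀ q ∈ F, ∃ s : Nat, 1 ≤ s ∧ q = rp p d.1 d.2 s := by
      intro q hq
      rcases hFchar with hF0 | ⟨m, hm2, hFc, hrun, hIe, hEe⟩
      · rw [hF0] at hq; exact absurd hq (List.not_mem_nil)
      · obtain ⟨sx, hs1, hs2, hs3⟩ := (hFc q).1 hq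
        exact ⟨sx, hs1, hs3⟩
    have hmem1 : ∀ q ∈ F ++ S, Inb bd q.1 q.2 ∧ pvOrig bd q.1 q.2 = 'O' ∧ Der bd st q := by
      intro q hq
      rcases List.mem_append.mp hq with hqF | hqS
      · rcases hFchar with hF0 | ⟨m, hm2, hFc, hrun, hIe, hEe⟩
        · rw [hF0] at hqF; exact absurd hqF (List.not_mem_nil)
        · obtain ⟨sx, hs1, hs2, hs3⟩ := (hFc q).1 hqF
          have hcur := hrun sx hs1 hs2
          refine ⟨hs3 ▸ hcur.1, hs3 ▸ hcur.2.2, ?_⟩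
          subst hs3
          rcases hcase with hder | ⟨hpst, hdot, hray⟩
          · -- origin is a flipped piece: a step
            rcases hEe with hES | hEB
            · exact Der.stepD p d.1 d.2 (m - 1) sx hder hd hs1 hs2
                (fun s h1 h2 => ⟨(hrun s h1 h2).1, (hrun s h1 h2).2.2⟩)
                (by rw [show m - 1 + 1 = m by omega]; exact hIe)
                (by rw [show m - 1 + 1 = m by omega]; exact (hmem _ hES).2.2)
            · exact Der.stepB p d.1 d.2 (m - 1) sx hder hd hs1 hs2
                (fun s h1 h2 => ⟨(hrun s h1 h2).1, (hrun s h1 h2).2.2⟩)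
                (by rw [show m - 1 + 1 = m by omega]; exact hIe)
                (by rw [show m - 1 + 1 = m by omega]; exact hEB)
          · -- origin is the placed piece on the fresh board: a base flip
            subst hpst
            have hEB : Blk bd (rp p d.1 d.2 m).1 (rp p d.1 d.2 m).2 := by
              rcases hEe with hES | hEB
              · exfalso
                obtain ⟨d', hd'1, hd'2, sy, hsy1, hsy2⟩ := hray _ hES
                by_cases hdd : d' = d
                · exact hd'2 (hdd ▸ List.mem_cons_self)
                · exact (rp_cross hd'1 hd hdd hsy1 (show 1 ≤ m by omega)) hsy2.symm
              · exact hEB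
            exact Der.base d.1 d.2 (m - 1) sx hd hs1 hs2
              (fun s h1 h2 => ⟨(hrun s h1 h2).1, (hrun s h1 h2).2.2⟩)
              (by rw [show m - 1 + 1 = m by omega]; exact hIe)
              (by rw [show m - 1 + 1 = m by omega]; exact hEB)
      · exact hmem q hqS
    have hdsub1 : ∀ q ∈ dq ++ E, q ∈ F ++ S := by
      intro q hq
      rcases List.mem_append.mp hq with h | h
      · exact List.mem_append_right _ (hdsub q h)
      · exact List.mem_append_left _ ((hEF q).1 h)
    have hJ1 : JP bd (F ++ S) (dq ++ E) p rem' := by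
      intro o u v k hduv hinst
      by_cases hoF : o ∈ F
      · exact Or.inl (List.mem_append_right _ ((hEF o).2 hoF))
      by_cases heF : rp o u v (k + 1) ∈ F
      · exact Or.inr (Or.inl (List.mem_append_right _ ((hEF _).2 heF)))
      rcases hJ o u v k hduv (stepInst_anti hinst hoF heF) with h | h | h | h
      · exact Or.inl (List.mem_append_left _ h)
      · exact Or.inr (Or.inl (List.mem_append_left _ h))
      · rcases List.mem_cons.mp h.2 with hdd | hdd
        · exfalso
          obtain ⟨hop, rfl⟩ := And.intro h.1 hdd.symm
          exact hkill6 k (hop ▸ hinst)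
        · exact Or.inr (Or.inr (Or.inl ⟨h.1, hdd⟩))
      · rcases List.mem_cons.mp h.2 with hdd | hdd
        · exfalso
          have hu : u = -d.1 := by
            have := congrArg Prod.fst hdd; simp at this; omega
          have hv : v = -d.2 := by
            have := congrArg Prod.snd hdd; simp at this; omega
          subst hu; subst hv
          exact hkill7 o k h.1 hinst
        · exact Or.inr (Or.inr (Or.inr ⟨h.1, hdd⟩))
    have hcase1 : Der bd st p ∨ (p = st ∧ pvOrig bd st.1 st.2 = '.' ∧
        (∀ q ∈ F ++ S, ∃ d' ∈ pvDirs, d' ∉ rem' ∧ ∃ s : Nat, 1 ≤ s ∧ q = rp p d'.1 d'.2 s)) := by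
      rcases hcase with hder | ⟨hpst, hdot, hray⟩
      · exact Or.inl hder
      · refine Or.inr ⟨hpst, hdot, ?_⟩
        intro q hq
        rcases List.mem_append.mp hq with h | h
        · obtain ⟨sx, hs1, hs2⟩ := hFray q h
          exact ⟨d, hd, (List.nodup_cons.mp hndrem).1, sx, hs1, hs2⟩
        · obtain ⟨d', hd'1, hd'2, hs⟩ := hray q h
          exact ⟨d', hd'1, fun hmem' => hd'2 (List.mem_cons_of_mem _ hmem'), hs⟩
    have hcnt1 : cnt + (F.length : Int) = ((F ++ S).length : Int) := by
      rw [hcnt]; simp; omega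
    obtain ⟨S', dq', cb', hfold, hSS, hrep', hnd', hmem', hdsub', hEnew, hlen', hJ', hcapt', hray'⟩ :=
      ih (fun d' hd' => hsub d' (List.mem_cons_of_mem _ hd')) (List.nodup_cons.mp hndrem).2
        (F ++ S) (dq ++ E) (cnt + (F.length : Int)) cb1 hrep1 hndS1 hmem1 hdsub1 hJ1 hcase1 hcnt1
    refine ⟨S', dq', cb', ?_, fun q hq => hSS q (List.mem_append_right _ hq), hrep', hnd', hmem',
      hdsub', ?_, ?_, hJ', ?_, hray'⟩
    · rw [List.foldl_cons, heval, hfold]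
    · obtain ⟨E2, hE2⟩ := hEnew
      exact ⟨E ++ E2, by rw [hE2, List.append_assoc]⟩
    · have h1 : (F ++ S).length = F.length + S.length := by simp [Nat.add_comm]
      have h2 : (dq ++ E).length = dq.length + E.length := by simp
      omega
    · intro hpst hdot d0 hd0 k t ht1 htk hrun hIe hBe
      rcases List.mem_cons.mp hd0 with hdd | hdd
      · subst hdd
        subst hpst
        rcases hcase with hder | ⟨_, _, hray⟩
        · exact absurd (der_orig_O hder) (by rw [hdot]; decide)
        · have hclean : ∀ s : Nat, 1 ≤ s → rp p d0.1 d0.2 s ∉ S := by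
            intro s hs1 hq
            obtain ⟨d', hd'1, hd'2, sy, hsy1, hsy2⟩ := hray _ hq
            by_cases hdd' : d' = d0
            · exact hd'2 (hdd' ▸ List.mem_cons_self)
            · exact (rp_cross hd'1 hd hdd' hsy1 hs1 hsy2.symm).elim
          have hcur : ∀ s, 1 ≤ s → s ≤ k →
              CurO bd S (rp p d0.1 d0.2 s).1 (rp p d0.1 d0.2 s).2 := by
            intro s h1 h2
            exact ⟨(hrun s h1 h2).1, hclean s h1, (hrun s h1 h2).2⟩
          have := hcapt k (by omega) hcur hIe (hclean (k+1) (by omega)) hBe t ht1 htk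
          exact hSS _ (List.mem_append_left _ this)
      · exact hcapt' hpst hdot d0 hdd k t ht1 htk hrun hIe hBe
-- ---- the pop loop of port A ----

lemma nodup_length_mono {S T : List (Int × Int)} (h1 : S.Nodup) (hsub : ∀ q ∈ S, q ∈ T) :
    S.length ≤ T.length := by
  calc S.length = S.toFinset.card := (List.toFinset_card_of_nodup h1).symm
    _ ≤ T.toFinset.card := Finset.card_le_card (fun q hq =>
        List.mem_toFinset.mpr (hsub q (List.mem_toFinset.mp hq)))
    _ ≤ T.length := T.toFinset_card_le

lemma length_le_area {bd : List String} {S : List (Int × Int)} (hnd : S.Nodup)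
    (hmem : ∀ q ∈ S, Inb bd q.1 q.2) :
    S.length ≤ bd.length * (PySem.Str.len (bd.headD "")).toNat := by
  have hsub : S.toFinset ⊆ (Finset.Icc (0 : Int) ((bd.length : Int) - 1)) ×ˢ
      (Finset.Icc (0 : Int) (PySem.Str.len (bd.headD "") - 1)) := by
    intro q hq
    obtain ⟨h1, h2, h3, h4⟩ := hmem q (List.mem_toFinset.mp hq)
    rw [Finset.mem_product, Finset.mem_Icc, Finset.mem_Icc]
    omega
  calc S.length = S.toFinset.card := (List.toFinset_card_of_nodup hnd).symm
    _ ≤ _ := Finset.card_le_card hsub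
    _ = ((bd.length : Int) - 1 + 1 - 0).toNat * (PySem.Str.len (bd.headD "") - 1 + 1 - 0).toNat := by
        rw [Finset.card_product, Int.card_Icc, Int.card_Icc]
    _ ≤ bd.length * (PySem.Str.len (bd.headD "")).toNat := by
        have h1 : ((bd.length : Int) - 1 + 1 - 0).toNat = bd.length := by omega
        have h2 : (PySem.Str.len (bd.headD "") - 1 + 1 - 0).toNat
            = (PySem.Str.len (bd.headD "")).toNat := by omega
        rw [h1, h2]

lemma loopA_spec {bd : List String} (st : Int × Int)
    (hlen : ∀ s ∈ bd, PySem.Str.len (bd.headD "") ≤ PySem.Str.len s) :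
    ∀ (fuel : Nat) (cb : List (List Char)) (dq S : List (Int × Int)) (cnt : Int),
      RepA bd S cb → S.Nodup →
      (∀ q ∈ S, Inb bd q.1 q.2 ∧ pvOrig bd q.1 q.2 = 'O' ∧ Der bd st q) →
      (∀ q ∈ dq, q ∈ S) →
      (∀ o u v k, (u, v) ∈ pvDirs → StepInst bd S o u v k →
        o ∈ dq ∨ rp o u v (k + 1) ∈ dq) →
      (∀ u v (k t : Nat), (u, v) ∈ pvDirs → 1 ≤ t → t ≤ k →
        (∀ s, 1 ≤ s → s ≤ k → Inb bd (rp st u v s).1 (rp st u v s).2 ∧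
          pvOrig bd (rp st u v s).1 (rp st u v s).2 = 'O') →
        Inb bd (rp st u v (k+1)).1 (rp st u v (k+1)).2 →
        Blk bd (rp st u v (k+1)).1 (rp st u v (k+1)).2 → rp st u v t ∈ S) →
      cnt = (S.length : Int) →
      dq.length + 2 * (bd.length * (PySem.Str.len (bd.headD "")).toNat - S.length) ≤ fuel →
      ∃ T : List (Int × Int), pvLoopA (bd.length : Int) (PySem.Str.len (bd.headD "")) cb dq cnt fuel
          = (T.length : Int) ∧ T.Nodup ∧ (∀ q, q ∈ T ↔ Der bd st q) := by
  intro fuel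
  induction fuel with
  | zero =>
    intro cb dq S cnt hrep hnd hmem hdsub hjinv hbse hcnt hbound
    have hdq : dq = [] := List.eq_nil_iff_length_eq_zero.mpr (by omega)
    subst hdq
    refine ⟨S, by rw [hcnt]; rfl, hnd, fun q => ⟨fun hq => (hmem q hq).2.2, ?_⟩⟩
    intro hder
    refine der_minimal bd st (fun q => q ∈ S) hbse ?_ q hder
    intro o u v k hduv hPo hk1 hrun hIe hEe t ht1 htk
    exact absurd (hjinv o u v k hduv
      ⟨hPo, hk1, fun s h1 h2 => ⟨(hrun s h1 h2).1, (hrun s h1 h2).2.2, (hrun s h1 h2).2.1⟩,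
        hIe, hEe⟩) (by simp)
  | succ f ihf =>
    intro cb dq S cnt hrep hnd hmem hdsub hjinv hbse hcnt hbound
    cases dq with
    | nil =>
      refine ⟨S, by rw [hcnt]; rfl, hnd, fun q => ⟨fun hq => (hmem q hq).2.2, ?_⟩⟩
      intro hder
      refine der_minimal bd st (fun q => q ∈ S) hbse ?_ q hder
      intro o u v k hduv hPo hk1 hrun hIe hEe t ht1 htk
      exact absurd (hjinv o u v k hduv
        ⟨hPo, hk1, fun s h1 h2 => ⟨(hrun s h1 h2).1, (hrun s h1 h2).2.2, (hrun s h1 h2).2.1⟩,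
          hIe, hEe⟩) (by simp)
    | cons q dq'' =>
      obtain ⟨qx, qy⟩ := q
      have hqS : (qx, qy) ∈ S := hdsub _ List.mem_cons_self
      have hqInb : Inb bd qx qy := (hmem _ hqS).1
      have hJ : JP bd S dq'' (qx, qy) pvDirs := by
        intro o u v k hduv hinst
        rcases hjinv o u v k hduv hinst with h | h
        · rcases List.mem_cons.mp h with h' | h'
          · exact Or.inr (Or.inr (Or.inl ⟨h', hduv⟩))
          · exact Or.inl h'
        · rcases List.mem_cons.mp h with h' | h'
          · exact Or.inr (Or.inr (Or.inr ⟨h', dirs_neg hduv⟩))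
          · exact Or.inr (Or.inl h')
      obtain ⟨S', dq', cb', hfold, hSS, hrep', hnd', hmem', hdsub', hEnew, hlenq, hJ', hcapt', hray'⟩ :=
        fold_spec st hlen hqInb pvDirs (fun d hd => hd) (by decide) S dq'' cnt cb
          hrep hnd hmem (fun q hq => hdsub q (List.mem_cons_of_mem _ hq)) hJ
          (Or.inl (hmem _ hqS).2.2) hcnt
      have heval : pvLoopA (bd.length : Int) (PySem.Str.len (bd.headD "")) cb
          ((qx, qy) :: dq'') cnt (f + 1)
          = pvLoopA (bd.length : Int) (PySem.Str.len (bd.headD "")) cb' dq'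
            ((S'.length : Int)) f := by
        simp only [pvLoopA]
        rw [hfold]
      rw [heval]
      have hjinv' : ∀ o u v k, (u, v) ∈ pvDirs → StepInst bd S' o u v k →
          o ∈ dq' ∨ rp o u v (k + 1) ∈ dq' := by
        intro o u v k hduv hinst
        rcases hJ' o u v k hduv hinst with h | h | h | h
        · exact Or.inl h
        · exact Or.inr h
        · exact absurd h.2 (List.not_mem_nil)
        · exact absurd h.2 (List.not_mem_nil)
      have hbse' : ∀ u v (k t : Nat), (u, v) ∈ pvDirs → 1 ≤ t → t ≤ k →
          (∀ s, 1 ≤ s → s ≤ k → Inb bd (rp st u v s).1 (rp st u v s).2 ∧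
            pvOrig bd (rp st u v s).1 (rp st u v s).2 = 'O') →
          Inb bd (rp st u v (k+1)).1 (rp st u v (k+1)).2 →
          Blk bd (rp st u v (k+1)).1 (rp st u v (k+1)).2 → rp st u v t ∈ S' := by
        intro u v k t hduv ht1 htk hrun hIe hBe
        exact hSS _ (hbse u v k t hduv ht1 htk hrun hIe hBe)
      refine ihf cb' dq' S' (S'.length : Int) hrep' hnd' hmem' hdsub' hjinv' hbse' rfl ?_
      have hb1 : S.length ≤ S'.length := nodup_length_mono hnd (fun q hq => hSS q hq)
      have hb2 : S'.length ≤ bd.length * (PySem.Str.len (bd.headD "")).toNat :=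
        length_le_area hnd' (fun q hq => (hmem' q hq).1)
      simp only [List.length_cons] at hbound
      omega
lemma start_run {bd : List String}
    (hlen : ∀ s ∈ bd, PySem.Str.len (bd.headD "") ≤ PySem.Str.len s)
    {st : Int × Int} (hstInb : Inb bd st.1 st.2) (hdot : pvOrig bd st.1 st.2 = '.') :
    ∃ T : List (Int × Int),
      pvLoopA (bd.length : Int) (PySem.Str.len (bd.headD "")) (bd.map String.toList) [st] 0
        (2 * (((bd.length : Int)) * PySem.Str.len (bd.headD "")).toNat + 2)
        = (T.length : Int) ∧ T.Nodup ∧ (∀ q, q ∈ T ↔ Der bd st q) := by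
  have hC0 : 0 ≤ PySem.Str.len (bd.headD "") := by
    rw [PySem.Str.len_eq]; positivity
  have hArea : ((bd.length : Int) * PySem.Str.len (bd.headD "")).toNat
      = bd.length * (PySem.Str.len (bd.headD "")).toNat := by
    rw [Int.toNat_mul (by positivity) hC0]
    simp
  obtain ⟨sx, sy⟩ := st
  have hJ0 : JP bd [] [] (sx, sy) pvDirs :=
    fun o u v k _ hinst => absurd hinst.1 (List.not_mem_nil)
  obtain ⟨S', dq', cb', hfold, hSS, hrep', hnd', hmem', hdsub', hEnew, hlenq, hJ', hcapt', hray'⟩ :=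
    fold_spec (st := (sx, sy)) hlen hstInb pvDirs (fun d hd => hd) (by decide) [] [] 0
      (bd.map String.toList) (rep_init bd) List.nodup_nil (by simp) (by simp) hJ0
      (Or.inr ⟨rfl, hdot, by simp⟩) (by simp)
  have heval : pvLoopA (bd.length : Int) (PySem.Str.len (bd.headD ""))
      (bd.map String.toList) [(sx, sy)] 0
      (2 * (((bd.length : Int)) * PySem.Str.len (bd.headD "")).toNat + 2)
      = pvLoopA (bd.length : Int) (PySem.Str.len (bd.headD "")) cb' dq' ((S'.length : Int))
        (2 * (((bd.length : Int)) * PySem.Str.len (bd.headD "")).toNat + 1) := by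
    rw [show 2 * (((bd.length : Int)) * PySem.Str.len (bd.headD "")).toNat + 2
      = (2 * (((bd.length : Int)) * PySem.Str.len (bd.headD "")).toNat + 1) + 1 by ring]
    simp only [pvLoopA]
    rw [hfold]
  rw [heval]
  have hjinv' : ∀ o u v k, (u, v) ∈ pvDirs → StepInst bd S' o u v k →
      o ∈ dq' ∨ rp o u v (k + 1) ∈ dq' := by
    intro o u v k hduv hinst
    rcases hJ' o u v k hduv hinst with h | h | h | h
    · exact Or.inl h
    · exact Or.inr h
    · exact absurd h.2 (List.not_mem_nil)
    · exact absurd h.2 (List.not_mem_nil)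
  have hbse' : ∀ u v (k t : Nat), (u, v) ∈ pvDirs → 1 ≤ t → t ≤ k →
      (∀ s, 1 ≤ s → s ≤ k → Inb bd (rp (sx, sy) u v s).1 (rp (sx, sy) u v s).2 ∧
        pvOrig bd (rp (sx, sy) u v s).1 (rp (sx, sy) u v s).2 = 'O') →
      Inb bd (rp (sx, sy) u v (k+1)).1 (rp (sx, sy) u v (k+1)).2 →
      Blk bd (rp (sx, sy) u v (k+1)).1 (rp (sx, sy) u v (k+1)).2 → rp (sx, sy) u v t ∈ S' := by
    intro u v k t hduv ht1 htk hrun hIe hBe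
    exact hcapt' rfl hdot (u, v) hduv k t ht1 htk hrun hIe hBe
  refine loopA_spec (sx, sy) hlen _ cb' dq' S' ((S'.length : Int)) hrep' hnd' hmem' hdsub'
    hjinv' hbse' rfl ?_
  have hb2 : S'.length ≤ bd.length * (PySem.Str.len (bd.headD "")).toNat :=
    length_le_area hnd' (fun q hq => (hmem' q hq).1)
  simp only [List.length_nil] at hlenq
  rw [hArea]
  omega

-- ---- the O-run scan of port B ----

def GoodB (bd : List String) (r c : Int) (fl : List (Int × Int)) (x y u v : Int) (s : Nat) : Prop :=
  0 ≤ x + (s : Int) * u ∧ x + (s : Int) * u < r ∧ 0 ≤ y + (s : Int) * v ∧ y + (s : Int) * v < c ∧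
  (x + (s : Int) * u, y + (s : Int) * v) ∉ fl ∧ pvOrig bd (x + (s : Int) * u) (y + (s : Int) * v) = 'O'

lemma kscan_from (bd : List String) (r c : Int) (fl : PySem.Set (Int × Int)) (x y u v : Int) :
    ∀ (f j : Nat), 1 ≤ j → (∃ e : Nat, e ≤ f ∧ ¬ GoodB bd r c fl x y u v (j + e)) →
    ∃ m : Nat, j ≤ m ∧ pvKScan bd r c fl x y u v j f = m ∧
      (∀ s, j ≤ s → s < m → GoodB bd r c fl x y u v s) ∧ ¬ GoodB bd r c fl x y u v m := by
  intro f
  induction f with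
  | zero =>
    rintro j hj ⟨e, he, hbad⟩
    have he0 : e = 0 := by omega
    subst he0
    exact ⟨j, le_refl j, rfl, fun s h1 h2 => ((by omega : False)).elim, by simpa using hbad⟩
  | succ f ih =>
    rintro j hj ⟨e, he, hbad⟩
    by_cases hg : GoodB bd r c fl x y u v j
    · have hstep : pvKScan bd r c fl x y u v j (f + 1) = pvKScan bd r c fl x y u v (j + 1) f := by
        simp only [pvKScan]
        rw [if_pos (by simpa [GoodB] using hg)]
      have he1 : 1 ≤ e := by
        by_contra h
        have : e = 0 := by omega
        subst this
        simp at hbad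
        exact hbad hg
      obtain ⟨m, hm1, hm2, hm3, hm4⟩ := ih (j + 1) (by omega)
        ⟨e - 1, by omega, by rw [show j + 1 + (e - 1) = j + e by omega]; exact hbad⟩
      refine ⟨m, by omega, hstep.trans hm2, fun s h1 h2 => ?_, hm4⟩
      rcases Nat.eq_or_lt_of_le h1 with h | h
      · exact h ▸ hg
      · exact hm3 s h h2
    · refine ⟨j, le_refl j, ?_, fun s h1 h2 => ((by omega : False)).elim, hg⟩
      simp only [pvKScan]
      rw [if_neg (by simpa [GoodB] using hg)]

lemma goodB_iff (bd : List String) (fl : List (Int × Int)) (x y u v : Int) (s : Nat) :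
    GoodB bd (bd.length : Int) (PySem.Str.len (bd.headD "")) fl x y u v s ↔
      CurO bd fl (rp (x, y) u v s).1 (rp (x, y) u v s).2 := by
  constructor
  · rintro ⟨h1, h2, h3, h4, h5, h6⟩
    exact ⟨⟨h1, h2, h3, h4⟩, h5, h6⟩
  · rintro ⟨⟨h1, h2, h3, h4⟩, h5, h6⟩
    exact ⟨h1, h2, h3, h4, h5, h6⟩

lemma kscan_char (bd : List String) (fl : PySem.Set (Int × Int)) {x y : Int}
    (hpInb : Inb bd x y) {d : Int × Int} (hd : d ∈ pvDirs) :
    ∃ m : Nat, 1 ≤ m ∧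
      pvKScan bd (bd.length : Int) (PySem.Str.len (bd.headD "")) fl x y d.1 d.2 1
        (((bd.length : Int) + PySem.Str.len (bd.headD "")).toNat + 1) = m ∧
      (∀ s, 1 ≤ s → s < m → CurO bd fl (rp (x, y) d.1 d.2 s).1 (rp (x, y) d.1 d.2 s).2) ∧
      ¬ CurO bd fl (rp (x, y) d.1 d.2 m).1 (rp (x, y) d.1 d.2 m).2 := by
  obtain ⟨h1, h2, h3, h4⟩ := hpInb
  have hbad : ¬ GoodB bd (bd.length : Int) (PySem.Str.len (bd.headD "")) fl x y d.1 d.2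
      (1 + (((bd.length : Int) + PySem.Str.len (bd.headD "")).toNat + 1 - 1)) := by
    rcases dirs_cases d hd with h|h|h|h|h|h|h|h <;> subst h <;>
      (rintro ⟨g1, g2, g3, g4, _, _⟩; push_cast at g1 g2 g3 g4; omega)
  obtain ⟨m, hm1, hm2, hm3, hm4⟩ := kscan_from bd (bd.length : Int)
    (PySem.Str.len (bd.headD "")) fl x y d.1 d.2
    (((bd.length : Int) + PySem.Str.len (bd.headD "")).toNat + 1) 1 (le_refl 1)
    ⟨((bd.length : Int) + PySem.Str.len (bd.headD "")).toNat + 1 - 1, by omega, hbad⟩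
  exact ⟨m, hm1, hm2, fun s hs1 hs2 => (goodB_iff bd fl x y d.1 d.2 s).1 (hm3 s hs1 hs2),
    fun h => hm4 ((goodB_iff bd fl x y d.1 d.2 m).2 h)⟩

-- ---- the per-direction gains of port B ----

def pvGainsD (bd : List String) (r c x y : Int) (fl : PySem.Set (Int × Int))
    (d : Int × Int) : List (Int × Int) :=
  let k := pvKScan bd r c fl x y d.1 d.2 1 ((r + c).toNat + 1)
  if 1 < k ∧ 0 ≤ x + k * d.1 ∧ x + k * d.1 < r ∧ 0 ≤ y + k * d.2 ∧ y + k * d.2 < c ∧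
      ((x + k * d.1, y + k * d.2) ∈ fl ∨ pvOrig bd (x + k * d.1) (y + k * d.2) ≠ '.') then
    (PySem.List.pyRange 1 k).map (fun t => (x + t * d.1, y + t * d.2))
  else []

lemma rayGains_eq (bd : List String) (r c x y : Int) (fl : PySem.Set (Int × Int)) :
    pvRayGains bd r c x y fl = pvDirs.flatMap (pvGainsD bd r c x y fl) := by
  rw [pvRayGains]
  rw [show (fun (got : List (Int × Int)) (d : Int × Int) =>
      let k := pvKScan bd r c fl x y d.1 d.2 1 ((r + c).toNat + 1)
      if 1 < k ∧ 0 ≤ x + k * d.1 ∧ x + k * d.1 < r ∧ 0 ≤ y + k * d.2 ∧ y + k * d.2 < c ∧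
          ((x + k * d.1, y + k * d.2) ∈ fl ∨ pvOrig bd (x + k * d.1) (y + k * d.2) ≠ '.') then
        got ++ (PySem.List.pyRange 1 k).map (fun t => (x + t * d.1, y + t * d.2))
      else got)
      = fun (got : List (Int × Int)) (d : Int × Int) => got ++ pvGainsD bd r c x y fl d by
    funext got d
    simp only [pvGainsD]
    split_ifs with h
    · rfl
    · simp]
  rw [PySem.List.foldl_append_eq_flatMap]
  simp

lemma gainsD_sound {bd : List String} {fl : PySem.Set (Int × Int)} {x y : Int}
    (hpInb : Inb bd x y) {d : Int × Int} (hd : d ∈ pvDirs) :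
    ∀ q ∈ pvGainsD bd (bd.length : Int) (PySem.Str.len (bd.headD "")) x y fl d,
    ∃ m : Nat, 2 ≤ m ∧ (∃ s : Nat, 1 ≤ s ∧ s ≤ m - 1 ∧ q = rp (x, y) d.1 d.2 s) ∧
      (∀ s, 1 ≤ s → s ≤ m - 1 → CurO bd fl (rp (x, y) d.1 d.2 s).1 (rp (x, y) d.1 d.2 s).2) ∧
      Inb bd (rp (x, y) d.1 d.2 m).1 (rp (x, y) d.1 d.2 m).2 ∧
      (rp (x, y) d.1 d.2 m ∈ fl ∨ Blk bd (rp (x, y) d.1 d.2 m).1 (rp (x, y) d.1 d.2 m).2) := by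
  obtain ⟨m, hm1, hm2, hm3, hm4⟩ := kscan_char bd fl hpInb hd
  intro q hq
  rw [pvGainsD] at hq
  simp only [hm2] at hq
  split_ifs at hq with hcond
  · obtain ⟨hmlt, hb1, hb2, hb3, hb4, hend⟩ := hcond
    obtain ⟨t, ht, hqe⟩ := List.mem_map.mp hq
    have htr := PySem.List.mem_pyRange_one.mp ht
    have hts : t = ((t.toNat : Nat) : Int) := by omega
    refine ⟨m, by omega, ⟨t.toNat, by omega, by omega, ?_⟩, fun s h1 h2 => hm3 s h1 (by omega),
      ⟨hb1, hb2, hb3, hb4⟩, ?_⟩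
    · rw [← hqe]
      simp only [rp]
      rw [← hts]
    · by_cases hfl : rp (x, y) d.1 d.2 m ∈ fl
      · exact Or.inl hfl
      · refine Or.inr ⟨?_, ?_⟩
        · have : pvOrig bd (x + (m : Int) * d.1) (y + (m : Int) * d.2) ≠ '.' := by
            rcases hend with h | h
            · exact absurd (by simpa [rp] using h) hfl
            · exact h
          simpa [rp] using this
        · intro hO
          exact hm4 ⟨⟨hb1, hb2, hb3, hb4⟩, hfl, hO⟩
  · exact absurd hq (List.not_mem_nil)

lemma gainsD_complete {bd : List String} {fl : PySem.Set (Int × Int)} {x y : Int}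
    (hpInb : Inb bd x y) {d : Int × Int} (hd : d ∈ pvDirs) :
    ∀ k : Nat, 1 ≤ k →
    (∀ s, 1 ≤ s → s ≤ k → CurO bd fl (rp (x, y) d.1 d.2 s).1 (rp (x, y) d.1 d.2 s).2) →
    Inb bd (rp (x, y) d.1 d.2 (k+1)).1 (rp (x, y) d.1 d.2 (k+1)).2 →
    (rp (x, y) d.1 d.2 (k+1) ∈ fl ∨ Blk bd (rp (x, y) d.1 d.2 (k+1)).1 (rp (x, y) d.1 d.2 (k+1)).2) →
    ∀ t, 1 ≤ t → t ≤ k →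
      rp (x, y) d.1 d.2 t ∈ pvGainsD bd (bd.length : Int) (PySem.Str.len (bd.headD "")) x y fl d := by
  obtain ⟨m, hm1, hm2, hm3, hm4⟩ := kscan_char bd fl hpInb hd
  intro k hk1 hrun hIe hEe t ht1 htk
  have hklem : m = k + 1 := by
    have h1 : k + 1 ≤ m := by
      by_contra h
      exact hm4 (hrun m hm1 (by omega))
    rcases Nat.eq_or_lt_of_le h1 with h | h
    · omega
    · exfalso
      have hc := hm3 (k + 1) (by omega) h
      rcases hEe with hS | hB
      · exact hc.2.1 (by simpa using hS)
      · exact hB.2 hc.2.2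
  rw [pvGainsD]
  simp only [hm2]
  rw [if_pos ?_]
  · refine List.mem_map.mpr ⟨(t : Int), PySem.List.mem_pyRange_one.mpr (by omega), ?_⟩
    simp [rp]
  · obtain ⟨hb1, hb2, hb3, hb4⟩ := hIe
    refine ⟨by omega, by simpa [rp, hklem] using hb1, by simpa [rp, hklem] using hb2,
      by simpa [rp, hklem] using hb3, by simpa [rp, hklem] using hb4, ?_⟩
    rcases hEe with hS | hB
    · exact Or.inl (by simpa [rp, hklem] using hS)
    · exact Or.inr (by simpa [rp, hklem] using hB.1)
-- ---- the fixed-point sweep of port B ----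

lemma sweep_spec {bd : List String} (st : Int × Int) :
    ∀ (fuel : Nat) (fl : PySem.Set (Int × Int)), fl.Nodup →
      (∀ q ∈ fl, Inb bd q.1 q.2 ∧ pvOrig bd q.1 q.2 = 'O' ∧ Der bd st q) →
      bd.length * (PySem.Str.len (bd.headD "")).toNat ≤ fl.length + fuel →
      ∃ T : PySem.Set (Int × Int),
        pvSweep bd (bd.length : Int) (PySem.Str.len (bd.headD "")) fl fuel = T ∧
        (∀ q ∈ fl, q ∈ T) ∧ T.Nodup ∧
        (∀ q ∈ T, Inb bd q.1 q.2 ∧ pvOrig bd q.1 q.2 = 'O' ∧ Der bd st q) ∧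
        (∀ o u v k, (u, v) ∈ pvDirs → ¬ StepInst bd T o u v k) := by
  intro fuel
  induction fuel with
  | zero =>
    intro fl hnd hmem hfuel
    refine ⟨fl, rfl, fun q hq => hq, hnd, hmem, ?_⟩
    rintro o u v k hduv ⟨hoS, hk1, hrun, _, _⟩
    have hc := hrun 1 (le_refl 1) hk1
    have hnd1 : (rp o u v 1 :: fl).Nodup := List.nodup_cons.mpr ⟨hc.2.1, hnd⟩
    have hbound := length_le_area (bd := bd) hnd1 (by
      rintro q hq
      rcases List.mem_cons.mp hq with h | h
      · exact h ▸ hc.1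
      · exact (hmem q h).1)
    simp only [List.length_cons] at hbound
    omega
  | succ f ih =>
    intro fl hnd hmem hfuel
    have hgath : fl.foldl (fun acc q =>
        acc ++ pvRayGains bd (bd.length : Int) (PySem.Str.len (bd.headD "")) q.1 q.2 fl) []
        = fl.flatMap (fun q =>
          pvRayGains bd (bd.length : Int) (PySem.Str.len (bd.headD "")) q.1 q.2 fl) := by
      rw [PySem.List.foldl_append_eq_flatMap]
      simp
    by_cases hemp : (PySem.Set.ofList (fl.foldl (fun acc q =>
        acc ++ pvRayGains bd (bd.length : Int) (PySem.Str.len (bd.headD "")) q.1 q.2 fl) [])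
        : PySem.Set (Int × Int)) = []
    · have heval : pvSweep bd (bd.length : Int) (PySem.Str.len (bd.headD "")) fl (f + 1) = fl := by
        simp only [pvSweep]
        rw [if_pos hemp]
      refine ⟨fl, heval, fun q hq => hq, hnd, hmem, ?_⟩
      rintro o u v k hduv ⟨hoS, hk1, hrun, hIe, hEe⟩
      have hoInb : Inb bd o.1 o.2 := (hmem o hoS).1
      have hcell := gainsD_complete (fl := fl) (x := o.1) (y := o.2)
        hoInb hduv k hk1 (fun s h1 h2 => hrun s h1 h2) hIe hEe 1 (le_refl 1) hk1
      have hmemgath : rp (o.1, o.2) u v 1 ∈ fl.foldl (fun acc q =>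
          acc ++ pvRayGains bd (bd.length : Int) (PySem.Str.len (bd.headD "")) q.1 q.2 fl) [] := by
        rw [hgath]
        refine List.mem_flatMap.mpr ⟨o, hoS, ?_⟩
        rw [rayGains_eq]
        exact List.mem_flatMap.mpr ⟨(u, v), hduv, hcell⟩
      have : rp (o.1, o.2) u v 1 ∈ (PySem.Set.ofList (fl.foldl (fun acc q =>
          acc ++ pvRayGains bd (bd.length : Int) (PySem.Str.len (bd.headD "")) q.1 q.2 fl) [])
          : PySem.Set (Int × Int)) := (PySem.Set.mem_ofList _ _).mpr hmemgath
      rw [hemp] at this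
      exact absurd this (List.not_mem_nil)
    · have heval : pvSweep bd (bd.length : Int) (PySem.Str.len (bd.headD "")) fl (f + 1)
          = pvSweep bd (bd.length : Int) (PySem.Str.len (bd.headD ""))
            (PySem.Set.union fl (PySem.Set.ofList (fl.foldl (fun acc q =>
              acc ++ pvRayGains bd (bd.length : Int) (PySem.Str.len (bd.headD "")) q.1 q.2 fl) [])))
            f := by
        simp only [pvSweep]
        rw [if_neg hemp]
      set gained : PySem.Set (Int × Int) := PySem.Set.ofList (fl.foldl (fun acc q =>
        acc ++ pvRayGains bd (bd.length : Int) (PySem.Str.len (bd.headD "")) q.1 q.2 fl) [])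
        with hgained
      have hgmem : ∀ q ∈ gained, ∃ o ∈ fl, ∃ d ∈ pvDirs,
          q ∈ pvGainsD bd (bd.length : Int) (PySem.Str.len (bd.headD "")) o.1 o.2 fl d := by
        intro q hq
        have := (PySem.Set.mem_ofList _ _).mp hq
        rw [hgath] at this
        obtain ⟨o, ho, hqo⟩ := List.mem_flatMap.mp this
        rw [rayGains_eq] at hqo
        obtain ⟨d, hdm, hqd⟩ := List.mem_flatMap.mp hqo
        exact ⟨o, ho, d, hdm, hqd⟩
      have hgprops : ∀ q ∈ gained, (q ∉ fl) ∧ Inb bd q.1 q.2 ∧ pvOrig bd q.1 q.2 = 'O' ∧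
          Der bd st q := by
        intro q hq
        obtain ⟨o, ho, d, hdm, hqd⟩ := hgmem q hq
        obtain ⟨m, hm2, ⟨sx, hs1, hs2, hs3⟩, hrun, hIe, hEe⟩ :=
          gainsD_sound (hmem o ho).1 hdm q hqd
        have hcur := hrun sx hs1 hs2
        subst hs3
        refine ⟨hcur.2.1, hcur.1, hcur.2.2, ?_⟩
        rcases hEe with hES | hEB
        · exact Der.stepD (o.1, o.2) d.1 d.2 (m - 1) sx (hmem o ho).2.2 hdm hs1 hs2
            (fun s h1 h2 => ⟨(hrun s h1 h2).1, (hrun s h1 h2).2.2⟩)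
            (by rw [show m - 1 + 1 = m by omega]; exact hIe)
            (by rw [show m - 1 + 1 = m by omega]; exact (hmem _ hES).2.2)
        · exact Der.stepB (o.1, o.2) d.1 d.2 (m - 1) sx (hmem o ho).2.2 hdm hs1 hs2
            (fun s h1 h2 => ⟨(hrun s h1 h2).1, (hrun s h1 h2).2.2⟩)
            (by rw [show m - 1 + 1 = m by omega]; exact hIe)
            (by rw [show m - 1 + 1 = m by omega]; exact hEB)
      have hnd' : (PySem.Set.union fl gained).Nodup := PySem.Set.nodup_union fl gained hnd
      have hmem' : ∀ q ∈ PySem.Set.union fl gained,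
          Inb bd q.1 q.2 ∧ pvOrig bd q.1 q.2 = 'O' ∧ Der bd st q := by
        intro q hq
        rcases (PySem.Set.mem_union fl gained q).mp hq with h | h
        · exact hmem q h
        · exact (hgprops q h).2
      have hgrow : fl.length + 1 ≤ (PySem.Set.union fl gained).length := by
        obtain ⟨g, hg⟩ := List.exists_mem_of_ne_nil gained hemp
        have hgnotfl : g ∉ fl := (hgprops g hg).1
        have hnd1 : (g :: fl).Nodup := List.nodup_cons.mpr ⟨hgnotfl, hnd⟩
        have := nodup_length_mono hnd1 (by
          rintro q hq
          rcases List.mem_cons.mp hq with h | h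
          · exact (PySem.Set.mem_union fl gained q).mpr (Or.inr (h ▸ hg))
          · exact (PySem.Set.mem_union fl gained q).mpr (Or.inl h))
        simpa using this
      obtain ⟨T, hT, hsub, hndT, hmemT, hclosed⟩ := ih (PySem.Set.union fl gained) hnd' hmem'
        (by omega)
      refine ⟨T, heval.trans hT, fun q hq =>
        hsub q ((PySem.Set.mem_union fl gained q).mpr (Or.inl hq)), hndT, hmemT, hclosed⟩

lemma startB_run {bd : List String} {st : Int × Int} (hstInb : Inb bd st.1 st.2) :
    ∃ T : PySem.Set (Int × Int),
      pvSweep bd (bd.length : Int) (PySem.Str.len (bd.headD ""))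
        (PySem.Set.ofList (pvRayGains bd (bd.length : Int) (PySem.Str.len (bd.headD ""))
          st.1 st.2 PySem.Set.empty))
        (((bd.length : Int) * PySem.Str.len (bd.headD "")).toNat + 1) = T ∧
      T.Nodup ∧ (∀ q, q ∈ T ↔ Der bd st q) := by
  have hC0 : 0 ≤ PySem.Str.len (bd.headD "") := by
    rw [PySem.Str.len_eq]; positivity
  have hArea : ((bd.length : Int) * PySem.Str.len (bd.headD "")).toNat
      = bd.length * (PySem.Str.len (bd.headD "")).toNat := by
    rw [Int.toNat_mul (by positivity) hC0]
    simp
  have hf0 : ∀ q ∈ (PySem.Set.ofList (pvRayGains bd (bd.length : Int)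
      (PySem.Str.len (bd.headD "")) st.1 st.2 PySem.Set.empty) : PySem.Set (Int × Int)),
      Inb bd q.1 q.2 ∧ pvOrig bd q.1 q.2 = 'O' ∧ Der bd st q := by
    intro q hq
    have := (PySem.Set.mem_ofList _ _).mp hq
    rw [rayGains_eq] at this
    obtain ⟨d, hdm, hqd⟩ := List.mem_flatMap.mp this
    obtain ⟨m, hm2, ⟨sx, hs1, hs2, hs3⟩, hrun, hIe, hEe⟩ := gainsD_sound hstInb hdm q hqd
    have hcur := hrun sx hs1 hs2
    subst hs3
    refine ⟨hcur.1, hcur.2.2, ?_⟩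
    have hEB : Blk bd (rp (st.1, st.2) d.1 d.2 m).1 (rp (st.1, st.2) d.1 d.2 m).2 := by
      rcases hEe with hES | hEB
      · exact absurd hES (List.not_mem_nil)
      · exact hEB
    exact Der.base d.1 d.2 (m - 1) sx hdm hs1 hs2
      (fun s h1 h2 => ⟨(hrun s h1 h2).1, (hrun s h1 h2).2.2⟩)
      (by rw [show m - 1 + 1 = m by omega]; exact hIe)
      (by rw [show m - 1 + 1 = m by omega]; exact hEB)
  obtain ⟨T, hT, hsub, hndT, hmemT, hclosed⟩ := sweep_spec st
    (((bd.length : Int) * PySem.Str.len (bd.headD "")).toNat + 1)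
    (PySem.Set.ofList (pvRayGains bd (bd.length : Int) (PySem.Str.len (bd.headD ""))
      st.1 st.2 PySem.Set.empty))
    (PySem.Set.nodup_ofList _) hf0 (by rw [hArea]; omega)
  refine ⟨T, hT, hndT, fun q => ⟨fun hq => (hmemT q hq).2.2, ?_⟩⟩
  intro hder
  refine der_minimal bd st (fun q => q ∈ T) ?_ ?_ q hder
  · intro u v k t hduv ht1 htk hrun hIe hBe
    refine hsub _ ((PySem.Set.mem_ofList _ _).mpr ?_)
    rw [rayGains_eq]
    refine List.mem_flatMap.mpr ⟨(u, v), hduv, ?_⟩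
    exact gainsD_complete (fl := PySem.Set.empty) hstInb hduv k (by omega)
      (fun s h1 h2 => ⟨(hrun s h1 h2).1, List.not_mem_nil, (hrun s h1 h2).2⟩)
      hIe (Or.inr hBe) t ht1 htk
  · intro o u v k hduv hPo hk1 hrun hIe hEe t ht1 htk
    exact absurd ⟨hPo, hk1,
      fun s h1 h2 => ⟨(hrun s h1 h2).1, (hrun s h1 h2).2.2, (hrun s h1 h2).2.1⟩, hIe,
      hEe⟩ (hclosed o u v k hduv)

lemma count_eq {TA TB : List (Int × Int)} (h1 : TA.Nodup) (h2 : TB.Nodup)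
    {bd : List String} {st : Int × Int}
    (hA : ∀ q, q ∈ TA ↔ Der bd st q) (hB : ∀ q, q ∈ TB ↔ Der bd st q) :
    TA.length = TB.length :=
  le_antisymm (nodup_length_mono h1 (fun q hq => (hB q).2 ((hA q).1 hq)))
    (nodup_length_mono h2 (fun q hq => (hA q).2 ((hB q).1 hq)))

-- ===== VERDICT (by name: the statement is the Claim_ definition above) =====
theorem flipChess1_spec : Claim_equal_flipChess1 := by
  unfold Claim_equal_flipChess1
  intro bd _ hpre
  unfold Spec_flipChess1
  obtain ⟨hne, hlen⟩ := hpre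
  have hc0 : PySem.List.pyGetD bd 0 "" = bd.headD "" := by
    cases bd with
    | nil => exact absurd rfl hne
    | cons a l => simp [PySem.List.pyGetD_of_nonneg _ _ (le_refl (0 : Int))]
  simp only [flipChess1, flipChess1_alt, hc0]
  refine PySem.List.foldl_congr_mem _ _ _ _ ?_
  intro acc i hi
  refine PySem.List.foldl_congr_mem _ _ _ _ ?_
  intro acc2 j hj
  have hi' := PySem.List.mem_pyRange_one.mp hi
  have hj' := PySem.List.mem_pyRange_one.mp hj
  rw [show ((PySem.Str.pyGet? (PySem.List.pyGetD bd i "") j).getD ' ') = pvOrig bd i j from rfl]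
  by_cases hdot : pvOrig bd i j ≠ '.'
  · rw [if_pos hdot, if_pos hdot]
  · rw [if_neg hdot, if_neg hdot]
    push Not at hdot
    have hInb : Inb bd i j := ⟨hi'.1, hi'.2, hj'.1, hj'.2⟩
    obtain ⟨TA, hTAeq, hTAnd, hTA⟩ := start_run hlen (st := (i, j)) hInb hdot
    obtain ⟨TB, hTBeq, hTBnd, hTB⟩ := startB_run (st := (i, j)) hInb
    rw [hTAeq, hTBeq, count_eq hTAnd hTBnd hTA hTB]
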